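-- pv_equiv track=rewrite | github.com/Last1k96/layers-insight | backend/utils/dag_regions.py | _dominators
-- ===== SOURCE A (Python) =====
-- def _dominators(
--     topo: list[str],
--     sources: list[str],
--     pred: dict[str, set[str]],
-- ) -> dict[str, str]:
--     """Cooper-Harvey-Kennedy iterative dominators.
--
--     Multiple sources are unified via a virtual root. Returns idom[v]
--     for every node except the roots, which dominate themselves.
--     """
--     rank = {n: i for i, n in enumerate(topo)}
--     VROOT = "__sese_vroot__"
--     idom: dict[str, str] = {VROOT: VROOT}
--     for s in sources:
--         idom[s] = VROOT
--     # Treat VROOT as having rank -1 so that intersect can compare it.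
--     rank[VROOT] = -1
--
--     def intersect(b1: str, b2: str) -> str:
--         # Walk both pointers up the dominator tree until they meet.
--         # Both must already be in idom; rank gives "depth" via topo
--         # order (smaller rank = closer to root in topo, deeper in dom).
--         finger1, finger2 = b1, b2
--         while finger1 != finger2:
--             while rank.get(finger1, 10**9) > rank.get(finger2, 10**9):
--                 finger1 = idom.get(finger1, finger1)
--                 if finger1 == VROOT and finger2 == VROOT:
--                     return VROOT
--             while rank.get(finger2, 10**9) > rank.get(finger1, 10**9):
--                 finger2 = idom.get(finger2, finger2)
--                 if finger1 == VROOT and finger2 == VROOT: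
--                     return VROOT
--         return finger1
--
--     changed = True
--     while changed:
--         changed = False
--         for v in topo:
--             if v in sources:
--                 continue
--             preds = [p for p in pred[v] if p in idom]
--             if not preds:
--                 # Unreachable from any source — skip.
--                 continue
--             new_idom = preds[0]
--             for p in preds[1:]:
--                 if p in idom:
--                     new_idom = intersect(p, new_idom)
--             if idom.get(v) != new_idom:
--                 idom[v] = new_idom
--                 changed = True
--
--     # Drop VROOT entries — convert to "node dominates itself" for sources.
--     result: dict[str, str] = {}
--     for v in topo:
--         d = idom.get(v, v)
--         if d == VROOT:
--             result[v] = v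
--         else:
--             result[v] = d
--     return result
-- ===== SOURCE B (Python) =====
-- def _rk(x, rank):
--     return -1 if x is None else rank[x]
--
--
-- def _nca(a, b, idom, rank):
--     # Nearest common ancestor in the dominator forest; None is the
--     # virtual root sitting above every source.
--     while a != b:
--         if _rk(a, rank) > _rk(b, rank):
--             a = idom[a]
--         else:
--             b = idom[b]
--     return a
--
--
-- def _dominators(topo, sources, pred):
--     """Single pass in topological order: predecessors precede each node,
--     so their immediate dominators are already final when the node is
--     reached; no fixpoint iteration is needed."""
--     rank = {n: i for i, n in enumerate(topo)}
--     srcs = set(sources)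
--     idom = {}  # node -> immediate dominator; None = virtual root
--     for v in topo:
--         if v in srcs:
--             idom[v] = None
--             continue
--         ps = [p for p in pred[v] if p in idom]
--         if not ps:
--             continue  # unreachable from every source
--         d = ps[0]
--         for p in ps[1:]:
--             d = _nca(p, d, idom, rank)
--         idom[v] = d
--     return {v: (idom[v] if idom.get(v) is not None else v) for v in topo}
-- ===== Notes on version B (the rewrite author's own statement) =====
-- stated objective: alternative
-- what changed: Replaces the Cooper-Harvey-Kennedy repeat-until-fixpoint sweep (plus VROOT string sentinel) by a single pass in topological order (predecessors precede each node, so their idoms are already final), with None as the virtual root and a single flattened NCA walk instead of the nested finger loops.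
-- outside the precondition, e.g. on _dominators(['a'], ['b'], {'a': ['b']}): A returns {'a': 'b'}, B returns {'a': 'a'}
import Mathlib
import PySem

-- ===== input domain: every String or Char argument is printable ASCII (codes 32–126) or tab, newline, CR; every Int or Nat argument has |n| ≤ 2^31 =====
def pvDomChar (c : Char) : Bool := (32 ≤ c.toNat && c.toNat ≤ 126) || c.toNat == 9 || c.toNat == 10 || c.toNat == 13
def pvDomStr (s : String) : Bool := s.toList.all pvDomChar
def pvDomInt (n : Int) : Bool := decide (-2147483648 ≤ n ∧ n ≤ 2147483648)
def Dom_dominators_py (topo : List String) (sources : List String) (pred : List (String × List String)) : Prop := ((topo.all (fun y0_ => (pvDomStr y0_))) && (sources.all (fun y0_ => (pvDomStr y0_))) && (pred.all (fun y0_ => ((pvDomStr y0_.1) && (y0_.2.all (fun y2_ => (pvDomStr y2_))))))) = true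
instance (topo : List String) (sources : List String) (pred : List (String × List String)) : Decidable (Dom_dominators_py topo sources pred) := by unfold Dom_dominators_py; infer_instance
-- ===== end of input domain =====

-- B replaces A's repeat-until-fixpoint dominator sweeps (with a string VROOT sentinel) by a
-- single pass in topological order with Option-valued idoms (an alternative algorithm).


-- ===== PORT A =====
-- Python: VROOT = "__sese_vroot__"
def pvVROOT : String := "__sese_vroot__"

-- inner `while rank.get(finger1,10**9) > rank.get(finger2,10**9):` of intersect, fueled
-- (Python loops unboundedly; the fuel is generous enough for every input admitted by Pre_).
-- `.inl r` models the early `return VROOT` escaping intersect; `.inr f1` is the finger on exit.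
def pvLift (rank : PySem.Dict String Int) (idom : PySem.Dict String String)
    : Nat → String → String → String ⊕ String
  | 0, f1, _ => Sum.inr f1
  | fuel+1, f1, f2 =>
      if rank.getD f1 1000000000 > rank.getD f2 1000000000 then
        let f1' := idom.getD f1 f1
        if f1' = pvVROOT ∧ f2 = pvVROOT then Sum.inl pvVROOT
        else pvLift rank idom fuel f1' f2
      else Sum.inr f1

-- outer `while finger1 != finger2:` of intersect, fueled
def pvInterLoop (rank : PySem.Dict String Int) (idom : PySem.Dict String String) (fuelI : Nat)
    : Nat → String → String → String
  | 0, f1, _ => f1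
  | fuel+1, f1, f2 =>
      if f1 = f2 then f1
      else
        match pvLift rank idom fuelI f1 f2 with
        | Sum.inl r => r
        | Sum.inr f1' =>
          match pvLift rank idom fuelI f2 f1' with
          | Sum.inl r => r
          | Sum.inr f2' => pvInterLoop rank idom fuelI fuel f1' f2'

-- def intersect(b1, b2)
def pvIntersect (rank : PySem.Dict String Int) (idom : PySem.Dict String String) (n : Nat)
    (b1 b2 : String) : String :=
  pvInterLoop rank idom (2*n+4) (2*n+4) b1 b2

-- body of `for v in topo:` inside the `while changed:` sweep; state = (idom, changed)
-- Python raises KeyError when a non-source v is missing from pred; Pre_ excludes that,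
-- so the `getD v []` default is unreachable on admitted inputs.
def pvStepA (sources : List String) (predD : PySem.Dict String (List String))
    (rank : PySem.Dict String Int) (n : Nat)
    (st : PySem.Dict String String × Bool) (v : String) : PySem.Dict String String × Bool :=
  if v ∈ sources then st
  else
    let idom := st.1
    let preds := (predD.getD v []).filter (fun p => idom.contains p)
    match preds with
    | [] => st
    | p0 :: rest =>
        let newIdom := rest.foldl
          (fun acc p => if idom.contains p then pvIntersect rank idom n p acc else acc) p0
        if idom.get? v ≠ some newIdom then (idom.insert v newIdom, true) else st

-- `while changed:` fueled (≤ 2 sweeps happen on inputs admitted by Pre_)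
def pvWhileA (topo sources : List String) (predD : PySem.Dict String (List String))
    (rank : PySem.Dict String Int) (n : Nat) : Nat → PySem.Dict String String → PySem.Dict String String
  | 0, idom => idom
  | fuel+1, idom =>
      match topo.foldl (pvStepA sources predD rank n) (idom, false) with
      | (idom', true) => pvWhileA topo sources predD rank n fuel idom'
      | (idom', false) => idom'

def dominators_py (topo : List String) (sources : List String) (pred : List (String × List String)) : List (String × String) :=
  let predD := PySem.Dict.ofList pred
  -- rank = {n: i for i, n in enumerate(topo)}
  let rank0 := (PySem.List.enumerate topo).foldl (fun d p => d.insert p.2 p.1) PySem.Dict.empty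
  -- idom = {VROOT: VROOT}; for s in sources: idom[s] = VROOT
  let idom0 := sources.foldl (fun d s => d.insert s pvVROOT) (PySem.Dict.empty.insert pvVROOT pvVROOT)
  -- rank[VROOT] = -1
  let rank := rank0.insert pvVROOT (-1)
  let n := topo.length
  let idomF := pvWhileA topo sources predD rank n (n + 2) idom0
  -- result loop
  (topo.foldl (fun res v =>
      let d := idomF.getD v v
      res.insert v (if d = pvVROOT then v else d)) PySem.Dict.empty).items

-- ===== PORT B =====
-- def _rk(x, rank)  (Python raises KeyError for x not in rank; unreachable under Pre_)
def pvRkB (rank : PySem.Dict String Int) : Option String → Int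
  | none => -1
  | some x => rank.getD x 0

-- `a = idom[a]` (a is never None when lifted; KeyError unreachable under Pre_)
def pvParentB (idom : PySem.Dict String (Option String)) : Option String → Option String
  | none => none
  | some x => idom.getD x none

-- def _nca(a, b, idom, rank), fueled (terminates on all inputs admitted by Pre_)
def pvNca (rank : PySem.Dict String Int) (idom : PySem.Dict String (Option String))
    : Nat → Option String → Option String → Option String
  | 0, a, _ => a
  | fuel+1, a, b =>
      if a = b then a
      else if pvRkB rank a > pvRkB rank b then pvNca rank idom fuel (pvParentB idom a) b
      else pvNca rank idom fuel a (pvParentB idom b)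

-- body of B's single `for v in topo:` pass (KeyError on a missing pred key is
-- unreachable under Pre_, hence the getD default)
def pvStepB (sources : List String) (predD : PySem.Dict String (List String))
    (rank : PySem.Dict String Int) (n : Nat)
    (idom : PySem.Dict String (Option String)) (v : String) : PySem.Dict String (Option String) :=
  if v ∈ sources then idom.insert v none
  else
    let ps := (predD.getD v []).filter (fun p => idom.contains p)
    match ps with
    | [] => idom
    | p0 :: rest =>
        idom.insert v (rest.foldl (fun d p => pvNca rank idom (2*n+4) (some p) d) (some p0))

def dominators_py_alt (topo : List String) (sources : List String) (pred : List (String × List String)) : List (String × String) :=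
  let predD := PySem.Dict.ofList pred
  let rank := (PySem.List.enumerate topo).foldl (fun d p => d.insert p.2 p.1) PySem.Dict.empty
  let n := topo.length
  let idom := topo.foldl (pvStepB sources predD rank n) PySem.Dict.empty
  (topo.foldl (fun res v =>
      res.insert v (match idom.get? v with
        | some (some d) => d
        | _ => v)) PySem.Dict.empty).items

-- ===== PRECONDITION & SPEC =====
-- Pre_ admits the function's contract-conforming inputs: either every node is a source
-- (nothing is computed), or topo is a duplicate-free topological order in which every
-- in-topo predecessor of a non-source node occurs strictly earlier, every non-source node
-- has a pred entry (otherwise Python raises KeyError), and the reserved sentinel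
-- "__sese_vroot__" does not occur as a node.  Outside this contract A may diverge (its
-- finger walk can get stuck), raise KeyError, or return accidental sentinel-/order-
-- dependent values (see the cited excluded examples).
def Pre_dominators_py (topo : List String) (sources : List String) (pred : List (String × List String)) : Prop :=
  (∀ v ∈ topo, v ∈ sources) ∨
  (topo.Nodup ∧ "__sese_vroot__" ∉ topo ∧
  ∀ v ∈ topo, v ∉ sources →
    ((PySem.Dict.ofList pred).get? v).isSome = true ∧
    ∀ p ∈ (PySem.Dict.ofList pred).getD v [],
      (p ∈ topo ∧ topo.idxOf p < topo.idxOf v) ∨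
      (p ∉ topo ∧ p ∉ sources ∧ p ≠ "__sese_vroot__"))
instance (topo : List String) (sources : List String) (pred : List (String × List String)) : Decidable (Pre_dominators_py topo sources pred) := by unfold Pre_dominators_py; infer_instance

def pvWitness_dominators_py : List String × List String × (List (String × List String)) :=
  (["a", "b", "c"], ["a"], [("b", ["a"]), ("c", ["a", "b"]), ("a", [])])

def Spec_dominators_py (topo : List String) (sources : List String) (pred : List (String × List String)) (out : List (String × String)) : Prop := out = dominators_py_alt topo sources pred
instance (topo : List String) (sources : List String) (pred : List (String × List String)) (out : List (String × String)) : Decidable (Spec_dominators_py topo sources pred out) := by unfold Spec_dominators_py; infer_instance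

-- ===== CLAIM (what is proved, stated in full; the proofs are below) =====
def Claim_equal_dominators_py : Prop := ∀ (topo : List String) (sources : List String) (pred : List (String × List String)), Dom_dominators_py topo sources pred → Pre_dominators_py topo sources pred → Spec_dominators_py topo sources pred (dominators_py topo sources pred)

-- ===== LEMMAS AND PROOFS =====

-- ---------- basic measures ----------

def pvMS (topo : List String) (f : String) : Nat :=
  if f = pvVROOT then 0 else topo.idxOf f + 1

def pvIdxS (topo : List String) (f : String) : Int := (pvMS topo f : Int) - 1

def pvOk (topo : List String) (f : String) : Prop := f = pvVROOT ∨ f ∈ topo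

def pvPhi : Option String → String
  | none => pvVROOT
  | some x => x

-- A-side state invariant: VROOT maps to itself; every stored value is VROOT or an
-- earlier topo node that itself has an entry.
def pvAInv (topo : List String) (Ad : PySem.Dict String String) : Prop :=
  Ad.get? pvVROOT = some pvVROOT ∧
  ∀ x ∈ topo, ∀ y, Ad.get? x = some y →
    y = pvVROOT ∨ (y ∈ topo ∧ topo.idxOf y < topo.idxOf x ∧ (Ad.get? y).isSome = true)

def pvStrOk (topo : List String) (Ad : PySem.Dict String String) (f : String) : Prop :=
  pvOk topo f ∧ (Ad.get? f).isSome = true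

-- B-side
def pvBOk (topo : List String) (Bd : PySem.Dict String (Option String)) (o : Option String) : Prop :=
  ∀ x, o = some x → x ∈ topo ∧ (Bd.get? x).isSome = true

def pvBInv (topo : List String) (Bd : PySem.Dict String (Option String)) : Prop :=
  ∀ x ∈ topo, ∀ o, Bd.get? x = some o → pvBOk topo Bd o ∧ pvMS topo (pvPhi o) ≤ topo.idxOf x

-- one-directional correspondence (A additionally holds not-yet-reached sources)
def pvCorr (topo : List String) (Ad : PySem.Dict String String)
    (Bd : PySem.Dict String (Option String)) : Prop :=
  ∀ x ∈ topo, ∀ o, Bd.get? x = some o → Ad.get? x = some (pvPhi o)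

-- a predecessor is either an earlier topo node, or an unreachable name that both
-- programs filter out of `preds` (it is never a key of either idom dictionary)
def pvPredOk (topo sources : List String) (v p : String) : Prop :=
  (p ∈ topo ∧ topo.idxOf p < topo.idxOf v) ∨ (p ∉ topo ∧ p ∉ sources ∧ p ≠ pvVROOT)

def pvAKeys (topo sources : List String) (Ad : PySem.Dict String String) : Prop :=
  ∀ x, (Ad.get? x).isSome = true → x = pvVROOT ∨ x ∈ sources ∨ x ∈ topo

def pvBKeys (topo : List String) (Bd : PySem.Dict String (Option String)) : Prop :=
  ∀ x, (Bd.get? x).isSome = true → x ∈ topo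

def pvRankOk (topo : List String) (rank : PySem.Dict String Int) : Prop :=
  ∀ f, pvOk topo f → rank.getD f 1000000000 = pvIdxS topo f

def pvRankOkB (topo : List String) (rank0 : PySem.Dict String Int) : Prop :=
  ∀ x ∈ topo, rank0.getD x 0 = (topo.idxOf x : Int)

-- ---------- small facts ----------

theorem pvMS_le_length (topo : List String) (f : String) (h : pvOk topo f) :
    pvMS topo f ≤ topo.length := by
  rcases h with h | h
  · simp [pvMS, h]
  · by_cases hv : f = pvVROOT
    · simp [pvMS, hv]
    · simp only [pvMS, if_neg hv]
      exact List.idxOf_lt_length_of_mem h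

theorem pvMS_inj (topo : List String) (hnd : topo.Nodup) (hvr : pvVROOT ∉ topo)
    {f1 f2 : String} (h1 : pvOk topo f1) (h2 : pvOk topo f2)
    (h : pvMS topo f1 = pvMS topo f2) : f1 = f2 := by
  rcases h1 with h1 | h1 <;> rcases h2 with h2 | h2
  · rw [h1, h2]
  · exfalso
    have : f2 ≠ pvVROOT := fun hh => hvr (hh ▸ h2)
    simp [pvMS, h1, this] at h
  · exfalso
    have : f1 ≠ pvVROOT := fun hh => hvr (hh ▸ h1)
    simp [pvMS, h2, this] at h
  · have e1 : f1 ≠ pvVROOT := fun hh => hvr (hh ▸ h1)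
    have e2 : f2 ≠ pvVROOT := fun hh => hvr (hh ▸ h2)
    simp only [pvMS, if_neg e1, if_neg e2, Nat.add_right_cancel_iff] at h
    have g1 : topo.idxOf f1 < topo.length := List.idxOf_lt_length_of_mem h1
    calc f1 = topo[topo.idxOf f1] := (List.getElem_idxOf g1).symm
      _ = topo[topo.idxOf f2] := by congr 1
      _ = f2 := List.getElem_idxOf (List.idxOf_lt_length_of_mem h2)

theorem pvMS_eq_zero (topo : List String) {f : String} (h : pvMS topo f = 0) : f = pvVROOT := by
  by_contra hne
  simp [pvMS, hne] at h

-- parent step on the A side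
theorem pvParent_ok (topo : List String) (hnd : topo.Nodup) (hvr : pvVROOT ∉ topo)
    (Ad : PySem.Dict String String) (hA : pvAInv topo Ad)
    {f : String} (hf : pvStrOk topo Ad f) (hne : f ≠ pvVROOT) :
    pvStrOk topo Ad (Ad.getD f f) ∧ pvMS topo (Ad.getD f f) < pvMS topo f := by
  rcases hf with ⟨hok, hsome⟩
  rcases hok with h | hmem
  · exact absurd h hne
  obtain ⟨y, hy⟩ := Option.isSome_iff_exists.mp hsome
  have hget : Ad.getD f f = y := by
    rw [PySem.Dict.getD_eq_get?_getD, hy]; rfl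
  rcases (hA.2 f hmem y hy) with hv | ⟨hyt, hlt, hys⟩
  · refine ⟨⟨Or.inl (hget.trans hv), ?_⟩, ?_⟩
    · rw [hget, hv]; exact Option.isSome_iff_exists.mpr ⟨pvVROOT, hA.1⟩
    · rw [hget, hv]; simp [pvMS, hne]
  · refine ⟨⟨Or.inr (hget ▸ hyt), hget ▸ hys⟩, ?_⟩
    have hyv : y ≠ pvVROOT := fun hh => hvr (hh ▸ hyt)
    rw [hget]
    simp only [pvMS, if_neg hyv, if_neg hne]
    omega

-- ---------- the shared flattened meet reference ----------

def pvMeetF (topo : List String) (Ad : PySem.Dict String String) : Nat → String → String → String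
  | 0, f1, _ => f1
  | F+1, f1, f2 =>
      if f1 = f2 then f1
      else if pvIdxS topo f1 > pvIdxS topo f2 then pvMeetF topo Ad F (Ad.getD f1 f1) f2
      else pvMeetF topo Ad F f1 (Ad.getD f2 f2)

def pvMeetS (topo : List String) (Ad : PySem.Dict String String) (f1 f2 : String) : String :=
  pvMeetF topo Ad (pvMS topo f1 + pvMS topo f2 + 1) f1 f2


theorem pvIdxS_lt_iff (topo : List String) (f1 f2 : String) :
    pvIdxS topo f1 > pvIdxS topo f2 ↔ pvMS topo f1 > pvMS topo f2 := by
  simp only [pvIdxS]; omega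

theorem pvMeetF_comm (topo : List String) (hnd : topo.Nodup) (hvr : pvVROOT ∉ topo)
    (Ad : PySem.Dict String String) (hA : pvAInv topo Ad) :
    ∀ F f1 f2, pvStrOk topo Ad f1 → pvStrOk topo Ad f2 →
      pvMS topo f1 + pvMS topo f2 ≤ F →
      pvMeetF topo Ad F f1 f2 = pvMeetF topo Ad F f2 f1 := by
  intro F
  induction F with
  | zero =>
    intro f1 f2 h1 h2 hb
    have e1 : f1 = pvVROOT := pvMS_eq_zero topo (by omega)
    have e2 : f2 = pvVROOT := pvMS_eq_zero topo (by omega)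
    rw [e1, e2]
  | succ F ih =>
    intro f1 f2 h1 h2 hb
    by_cases heq : f1 = f2
    · subst heq; simp [pvMeetF]
    · have hms : pvMS topo f1 ≠ pvMS topo f2 := fun hc =>
        heq (pvMS_inj topo hnd hvr h1.1 h2.1 hc)
      rcases lt_or_gt_of_ne hms with hlt | hgt
      · -- lift f2 on both sides
        have hc1 : ¬ pvIdxS topo f1 > pvIdxS topo f2 := by
          rw [pvIdxS_lt_iff]; omega
        have hc2 : pvIdxS topo f2 > pvIdxS topo f1 := by
          rw [pvIdxS_lt_iff]; omega
        have hne2 : f2 ≠ pvVROOT := by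
          intro hv
          have h0 : pvMS topo f2 = 0 := by simp [pvMS, hv]
          omega
        have hp := pvParent_ok topo hnd hvr Ad hA h2 hne2
        simp only [pvMeetF, if_neg heq, if_neg (Ne.symm heq), if_neg hc1, if_pos hc2]
        exact ih f1 (Ad.getD f2 f2) h1 hp.1 (by omega)
      · have hc1 : pvIdxS topo f1 > pvIdxS topo f2 := by
          rw [pvIdxS_lt_iff]; omega
        have hc2 : ¬ pvIdxS topo f2 > pvIdxS topo f1 := by
          rw [pvIdxS_lt_iff]; omega
        have hne1 : f1 ≠ pvVROOT := by
          intro hv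
          have h0 : pvMS topo f1 = 0 := by simp [pvMS, hv]
          omega
        have hp := pvParent_ok topo hnd hvr Ad hA h1 hne1
        simp only [pvMeetF, if_neg heq, if_neg (Ne.symm heq), if_pos hc1, if_neg hc2]
        exact ih (Ad.getD f1 f1) f2 hp.1 h2 (by omega)


theorem pvMeetF_stable (topo : List String) (hnd : topo.Nodup) (hvr : pvVROOT ∉ topo)
    (Ad : PySem.Dict String String) (hA : pvAInv topo Ad) :
    ∀ k F f1 f2, pvStrOk topo Ad f1 → pvStrOk topo Ad f2 →
      pvMS topo f1 + pvMS topo f2 ≤ k → k ≤ F →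
      pvMeetF topo Ad (F+1) f1 f2 = pvMeetF topo Ad F f1 f2 := by
  intro k
  induction k with
  | zero =>
    intro F f1 f2 h1 h2 hb hF
    have e1 : f1 = pvVROOT := pvMS_eq_zero topo (by omega)
    have e2 : f2 = pvVROOT := pvMS_eq_zero topo (by omega)
    subst e1; subst e2
    cases F <;> simp [pvMeetF]
  | succ k ih =>
    intro F f1 f2 h1 h2 hb hF
    by_cases heq : f1 = f2
    · subst heq
      cases F <;> simp [pvMeetF]
    · have hms : pvMS topo f1 ≠ pvMS topo f2 := fun hc =>
        heq (pvMS_inj topo hnd hvr h1.1 h2.1 hc)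
      obtain ⟨F', rfl⟩ : ∃ F', F = F' + 1 := by
        refine ⟨F - 1, ?_⟩
        have : 1 ≤ F := by
          rcases Nat.eq_zero_or_pos F with h0 | h1
          · exfalso; omega
          · omega
        omega
      rcases lt_or_gt_of_ne hms with hlt | hgt
      · have hc1 : ¬ pvIdxS topo f1 > pvIdxS topo f2 := by rw [pvIdxS_lt_iff]; omega
        have hc2 : pvIdxS topo f2 > pvIdxS topo f1 := by rw [pvIdxS_lt_iff]; omega
        have hne2 : f2 ≠ pvVROOT := by
          intro hv; have h0 : pvMS topo f2 = 0 := by simp [pvMS, hv]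
          omega
        have hp := pvParent_ok topo hnd hvr Ad hA h2 hne2
        show pvMeetF topo Ad (F'+1+1) f1 f2 = pvMeetF topo Ad (F'+1) f1 f2
        simp only [pvMeetF, if_neg heq, if_neg hc1, if_pos hc2]
        exact ih F' f1 (Ad.getD f2 f2) h1 hp.1 (by omega) (by omega)
      · have hc1 : pvIdxS topo f1 > pvIdxS topo f2 := by rw [pvIdxS_lt_iff]; omega
        have hne1 : f1 ≠ pvVROOT := by
          intro hv; have h0 : pvMS topo f1 = 0 := by simp [pvMS, hv]
          omega
        have hp := pvParent_ok topo hnd hvr Ad hA h1 hne1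
        show pvMeetF topo Ad (F'+1+1) f1 f2 = pvMeetF topo Ad (F'+1) f1 f2
        simp only [pvMeetF, if_neg heq, if_pos hc1]
        exact ih F' (Ad.getD f1 f1) f2 hp.1 h2 (by omega) (by omega)

theorem pvMeetF_eq_meetS (topo : List String) (hnd : topo.Nodup) (hvr : pvVROOT ∉ topo)
    (Ad : PySem.Dict String String) (hA : pvAInv topo Ad)
    (F : Nat) (f1 f2 : String) (h1 : pvStrOk topo Ad f1) (h2 : pvStrOk topo Ad f2)
    (hF : pvMS topo f1 + pvMS topo f2 + 1 ≤ F) :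
    pvMeetF topo Ad F f1 f2 = pvMeetS topo Ad f1 f2 := by
  induction F with
  | zero => omega
  | succ F ih =>
    rcases Nat.lt_or_ge F (pvMS topo f1 + pvMS topo f2 + 1) with hlt | hge
    · have : F + 1 = pvMS topo f1 + pvMS topo f2 + 1 := by omega
      rw [this]; rfl
    · rw [pvMeetF_stable topo hnd hvr Ad hA (pvMS topo f1 + pvMS topo f2) F f1 f2 h1 h2 (by omega) (by omega)]
      exact ih hge

theorem pvMeetS_refl (topo : List String) (Ad : PySem.Dict String String) (f : String) :
    pvMeetS topo Ad f f = f := by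
  simp [pvMeetS, pvMeetF]

theorem pvMeetS_comm (topo : List String) (hnd : topo.Nodup) (hvr : pvVROOT ∉ topo)
    (Ad : PySem.Dict String String) (hA : pvAInv topo Ad)
    (f1 f2 : String) (h1 : pvStrOk topo Ad f1) (h2 : pvStrOk topo Ad f2) :
    pvMeetS topo Ad f1 f2 = pvMeetS topo Ad f2 f1 := by
  unfold pvMeetS
  rw [pvMeetF_comm topo hnd hvr Ad hA _ f1 f2 h1 h2 (by omega)]
  congr 1
  omega

theorem pvMeetS_lift_left (topo : List String) (hnd : topo.Nodup) (hvr : pvVROOT ∉ topo)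
    (Ad : PySem.Dict String String) (hA : pvAInv topo Ad)
    (f1 f2 : String) (h1 : pvStrOk topo Ad f1) (h2 : pvStrOk topo Ad f2)
    (hgt : pvIdxS topo f1 > pvIdxS topo f2) :
    pvMeetS topo Ad f1 f2 = pvMeetS topo Ad (Ad.getD f1 f1) f2 := by
  have hms : pvMS topo f1 > pvMS topo f2 := (pvIdxS_lt_iff topo f1 f2).mp hgt
  have hne1 : f1 ≠ pvVROOT := by
    intro hv; have h0 : pvMS topo f1 = 0 := by simp [pvMS, hv]
    omega
  have heq : f1 ≠ f2 := by
    intro hv; rw [hv] at hms; omega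
  have hp := pvParent_ok topo hnd hvr Ad hA h1 hne1
  show pvMeetF topo Ad (pvMS topo f1 + pvMS topo f2 + 1) f1 f2 = _
  rw [show pvMS topo f1 + pvMS topo f2 + 1 = (pvMS topo f1 + pvMS topo f2) + 1 from rfl]
  simp only [pvMeetF, if_neg heq, if_pos hgt]
  exact pvMeetF_eq_meetS topo hnd hvr Ad hA _ _ _ hp.1 h2 (by omega)

-- the meet stays a well-formed finger no deeper than its arguments
theorem pvMeetF_ok (topo : List String) (hnd : topo.Nodup) (hvr : pvVROOT ∉ topo)
    (Ad : PySem.Dict String String) (hA : pvAInv topo Ad) :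
    ∀ F f1 f2, pvStrOk topo Ad f1 → pvStrOk topo Ad f2 →
      pvStrOk topo Ad (pvMeetF topo Ad F f1 f2) ∧
      pvMS topo (pvMeetF topo Ad F f1 f2) ≤ max (pvMS topo f1) (pvMS topo f2) := by
  intro F
  induction F with
  | zero =>
    intro f1 f2 h1 h2
    refine ⟨h1, ?_⟩
    show pvMS topo f1 ≤ _
    omega
  | succ F ih =>
    intro f1 f2 h1 h2
    by_cases heq : f1 = f2
    · subst heq
      have hr : pvMeetF topo Ad (F+1) f1 f1 = f1 := by simp [pvMeetF]
      rw [hr]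
      exact ⟨h1, by omega⟩
    · by_cases hc : pvIdxS topo f1 > pvIdxS topo f2
      · have hms : pvMS topo f1 > pvMS topo f2 := (pvIdxS_lt_iff topo f1 f2).mp hc
        have hne1 : f1 ≠ pvVROOT := by
          intro hv; have h0 : pvMS topo f1 = 0 := by simp [pvMS, hv]
          omega
        have hp := pvParent_ok topo hnd hvr Ad hA h1 hne1
        have := ih (Ad.getD f1 f1) f2 hp.1 h2
        simp only [pvMeetF, if_neg heq, if_pos hc]
        exact ⟨this.1, by omega⟩
      · have hne2 : f2 ≠ pvVROOT := by
          intro hv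
          have hms : pvMS topo f1 ≠ pvMS topo f2 := fun hcc =>
            heq (pvMS_inj topo hnd hvr h1.1 h2.1 hcc)
          have h0 : pvMS topo f2 = 0 := by simp [pvMS, hv]
          have : ¬ pvMS topo f1 > pvMS topo f2 := fun hgt => hc ((pvIdxS_lt_iff topo f1 f2).mpr hgt)
          omega
        have hp := pvParent_ok topo hnd hvr Ad hA h2 hne2
        have := ih f1 (Ad.getD f2 f2) h1 hp.1
        simp only [pvMeetF, if_neg heq, if_neg hc]
        exact ⟨this.1, by omega⟩

-- frame: the meet only reads entries strictly below a cut r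
theorem pvMeetF_frame (topo : List String) (hnd : topo.Nodup) (hvr : pvVROOT ∉ topo)
    (Ad₁ Ad₂ : PySem.Dict String String) (hA : pvAInv topo Ad₁) (r : Nat)
    (hagree : ∀ x, x = pvVROOT ∨ (x ∈ topo ∧ topo.idxOf x < r) → Ad₁.get? x = Ad₂.get? x) :
    ∀ F f1 f2, pvStrOk topo Ad₁ f1 → pvStrOk topo Ad₁ f2 →
      pvMS topo f1 ≤ r → pvMS topo f2 ≤ r →
      pvMeetF topo Ad₁ F f1 f2 = pvMeetF topo Ad₂ F f1 f2 := by
  intro F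
  induction F with
  | zero => intro f1 f2 _ _ _ _; rfl
  | succ F ih =>
    intro f1 f2 h1 h2 hr1 hr2
    by_cases heq : f1 = f2
    · simp [pvMeetF, heq]
    · have key : ∀ f : String, pvStrOk topo Ad₁ f → f ≠ pvVROOT → pvMS topo f ≤ r →
          Ad₁.getD f f = Ad₂.getD f f := by
        intro f hf hne hle
        have hmem : f ∈ topo := hf.1.resolve_left hne
        have : topo.idxOf f < r := by
          have : pvMS topo f = topo.idxOf f + 1 := by simp [pvMS, hne]
          omega
        rw [PySem.Dict.getD_eq_get?_getD, PySem.Dict.getD_eq_get?_getD,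
          hagree f (Or.inr ⟨hmem, this⟩)]
      by_cases hc : pvIdxS topo f1 > pvIdxS topo f2
      · have hms : pvMS topo f1 > pvMS topo f2 := (pvIdxS_lt_iff topo f1 f2).mp hc
        have hne1 : f1 ≠ pvVROOT := by
          intro hv; have h0 : pvMS topo f1 = 0 := by simp [pvMS, hv]
          omega
        have hp := pvParent_ok topo hnd hvr Ad₁ hA h1 hne1
        simp only [pvMeetF, if_neg heq, if_pos hc]
        rw [← key f1 h1 hne1 hr1]
        exact ih (Ad₁.getD f1 f1) f2 hp.1 h2 (by omega) hr2
      · have hne2 : f2 ≠ pvVROOT := by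
          intro hv
          have hms : pvMS topo f1 ≠ pvMS topo f2 := fun hcc =>
            heq (pvMS_inj topo hnd hvr h1.1 h2.1 hcc)
          have h0 : pvMS topo f2 = 0 := by simp [pvMS, hv]
          have : ¬ pvMS topo f1 > pvMS topo f2 := fun hgt => hc ((pvIdxS_lt_iff topo f1 f2).mpr hgt)
          omega
        have hp := pvParent_ok topo hnd hvr Ad₁ hA h2 hne2
        simp only [pvMeetF, if_neg heq, if_neg hc]
        rw [← key f2 h2 hne2 hr2]
        exact ih f1 (Ad₁.getD f2 f2) h1 hp.1 hr1 (by omega)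


-- ---------- B-side NCA lemmas ----------

theorem pvPhi_ok (topo : List String) (Bd : PySem.Dict String (Option String))
    {o : Option String} (h : pvBOk topo Bd o) : pvOk topo (pvPhi o) := by
  cases o with
  | none => exact Or.inl rfl
  | some x => exact Or.inr (h x rfl).1

theorem pvPhi_inj (topo : List String) (hvr : pvVROOT ∉ topo)
    (Bd : PySem.Dict String (Option String)) {a b : Option String}
    (ha : pvBOk topo Bd a) (hb : pvBOk topo Bd b) (h : pvPhi a = pvPhi b) : a = b := by
  cases a with
  | none =>
    cases b with
    | none => rfl
    | some y => exact absurd ((hb y rfl).1) (by simp [pvPhi] at h; rw [← h]; exact hvr)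
  | some x =>
    cases b with
    | none => exact absurd ((ha x rfl).1) (by simp [pvPhi] at h; rw [h]; exact hvr)
    | some y => simp [pvPhi] at h; rw [h]

theorem pvRkB_eq (topo : List String) (hvr : pvVROOT ∉ topo)
    (rank0 : PySem.Dict String Int) (hR : pvRankOkB topo rank0)
    (Bd : PySem.Dict String (Option String)) {a : Option String} (ha : pvBOk topo Bd a) :
    pvRkB rank0 a = pvIdxS topo (pvPhi a) := by
  cases a with
  | none => simp [pvRkB, pvPhi, pvIdxS, pvMS]
  | some x =>
    have hx := (ha x rfl).1
    have hne : x ≠ pvVROOT := fun hh => hvr (hh ▸ hx)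
    simp [pvRkB, pvPhi, pvIdxS, pvMS, hne, hR x hx]

theorem pvBOk_parent (topo : List String) (Bd : PySem.Dict String (Option String))
    (hB : pvBInv topo Bd) {a : Option String} (ha : pvBOk topo Bd a) {x : String}
    (hx : a = some x) :
    pvBOk topo Bd (pvParentB Bd a) ∧
      pvMS topo (pvPhi (pvParentB Bd a)) ≤ topo.idxOf x := by
  subst hx
  obtain ⟨hmem, hsome⟩ := ha x rfl
  obtain ⟨o, ho⟩ := Option.isSome_iff_exists.mp hsome
  have hpar : pvParentB Bd (some x) = o := by
    simp [pvParentB, PySem.Dict.getD_eq_get?_getD, ho]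
  rw [hpar]
  exact hB x hmem o ho

theorem pvNca_ok (topo : List String) (hvr : pvVROOT ∉ topo)
    (Bd : PySem.Dict String (Option String))
    (rank0 : PySem.Dict String Int) (hR : pvRankOkB topo rank0) (hB : pvBInv topo Bd) :
    ∀ fuel a b, pvBOk topo Bd a → pvBOk topo Bd b →
      pvBOk topo Bd (pvNca rank0 Bd fuel a b) ∧
      pvMS topo (pvPhi (pvNca rank0 Bd fuel a b)) ≤
        max (pvMS topo (pvPhi a)) (pvMS topo (pvPhi b)) := by
  intro fuel
  induction fuel with
  | zero => intro a b ha hb; exact ⟨ha, by show pvMS topo (pvPhi a) ≤ _; omega⟩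
  | succ fuel ih =>
    intro a b ha hb
    by_cases heq : a = b
    · have hr : pvNca rank0 Bd (fuel+1) a b = a := by simp [pvNca, heq]
      rw [hr]; exact ⟨ha, by omega⟩
    · by_cases hc : pvRkB rank0 a > pvRkB rank0 b
      · -- lift a
        have hra := pvRkB_eq topo hvr rank0 hR Bd ha
        have hrb := pvRkB_eq topo hvr rank0 hR Bd hb
        have hms : pvMS topo (pvPhi a) > pvMS topo (pvPhi b) := by
          rw [hra, hrb] at hc
          exact (pvIdxS_lt_iff topo _ _).mp hc
        obtain ⟨x, rfl⟩ : ∃ x, a = some x := by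
          cases a with
          | none =>
            exfalso
            have h0 : pvMS topo (pvPhi (none : Option String)) = 0 := by simp [pvPhi, pvMS]
            omega
          | some x => exact ⟨x, rfl⟩
        have hp := pvBOk_parent topo Bd hB ha rfl
        have hstep : pvNca rank0 Bd (fuel+1) (some x) b =
            pvNca rank0 Bd fuel (pvParentB Bd (some x)) b := by
          simp [pvNca, heq, hc]
        have hmsx : pvMS topo (pvPhi (some x)) = topo.idxOf x + 1 := by
          have : x ≠ pvVROOT := fun hh => hvr (hh ▸ (ha x rfl).1)
          simp [pvPhi, pvMS, this]
        rw [hstep]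
        have := ih (pvParentB Bd (some x)) b hp.1 hb
        refine ⟨this.1, ?_⟩
        have hple := hp.2
        omega
      · -- lift b
        have hra := pvRkB_eq topo hvr rank0 hR Bd ha
        have hrb := pvRkB_eq topo hvr rank0 hR Bd hb
        have hms : pvMS topo (pvPhi b) ≥ pvMS topo (pvPhi a) := by
          rw [hra, hrb] at hc
          simp only [pvIdxS] at hc
          omega
        obtain ⟨y, rfl⟩ : ∃ y, b = some y := by
          cases b with
          | none =>
            exfalso
            have h0 : pvMS topo (pvPhi (none : Option String)) = 0 := by simp [pvPhi, pvMS]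
            have ha0 : pvMS topo (pvPhi a) = 0 := by omega
            have : pvPhi a = pvVROOT := pvMS_eq_zero topo ha0
            exact heq (pvPhi_inj topo hvr Bd ha hb (by show pvPhi a = pvPhi none; rw [this]; rfl))
          | some y => exact ⟨y, rfl⟩
        have hp := pvBOk_parent topo Bd hB hb rfl
        have hstep : pvNca rank0 Bd (fuel+1) a (some y) =
            pvNca rank0 Bd fuel a (pvParentB Bd (some y)) := by
          simp [pvNca, heq, hc]
        have hmsy : pvMS topo (pvPhi (some y)) = topo.idxOf y + 1 := by
          have : y ≠ pvVROOT := fun hh => hvr (hh ▸ (hb y rfl).1)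
          simp [pvPhi, pvMS, this]
        rw [hstep]
        have := ih a (pvParentB Bd (some y)) ha hp.1
        refine ⟨this.1, ?_⟩
        have hple := hp.2
        omega

theorem pvNca_phi (topo : List String) (hnd : topo.Nodup) (hvr : pvVROOT ∉ topo)
    (Ad : PySem.Dict String String) (Bd : PySem.Dict String (Option String))
    (rank0 : PySem.Dict String Int) (hR : pvRankOkB topo rank0)
    (hA : pvAInv topo Ad) (hB : pvBInv topo Bd) (hC : pvCorr topo Ad Bd) :
    ∀ fuel a b, pvBOk topo Bd a → pvBOk topo Bd b →
      pvPhi (pvNca rank0 Bd fuel a b) = pvMeetF topo Ad fuel (pvPhi a) (pvPhi b) := by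
  intro fuel
  induction fuel with
  | zero => intro a b _ _; rfl
  | succ fuel ih =>
    intro a b ha hb
    by_cases heq : a = b
    · subst heq; simp [pvNca, pvMeetF]
    · have hphne : pvPhi a ≠ pvPhi b := fun h => heq (pvPhi_inj topo hvr Bd ha hb h)
      have hra := pvRkB_eq topo hvr rank0 hR Bd ha
      have hrb := pvRkB_eq topo hvr rank0 hR Bd hb
      by_cases hc : pvRkB rank0 a > pvRkB rank0 b
      · have hc' : pvIdxS topo (pvPhi a) > pvIdxS topo (pvPhi b) := by rw [← hra, ← hrb]; exact hc
        obtain ⟨x, rfl⟩ : ∃ x, a = some x := by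
          cases a with
          | none =>
            exfalso
            have : pvIdxS topo (pvPhi (none : Option String)) = -1 := by simp [pvPhi, pvIdxS, pvMS]
            have hbge : pvIdxS topo (pvPhi b) ≥ -1 := by simp only [pvIdxS]; omega
            omega
          | some x => exact ⟨x, rfl⟩
        -- parent agreement through the correspondence
        obtain ⟨hmem, hsome⟩ := ha x rfl
        obtain ⟨o, ho⟩ := Option.isSome_iff_exists.mp hsome
        have hpar : pvParentB Bd (some x) = o := by
          simp [pvParentB, PySem.Dict.getD_eq_get?_getD, ho]
        have hparA : Ad.getD (pvPhi (some x)) (pvPhi (some x)) = pvPhi o := by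
          have := hC x hmem o ho
          simp [pvPhi, PySem.Dict.getD_eq_get?_getD, this]
        have hstepB : pvNca rank0 Bd (fuel+1) (some x) b =
            pvNca rank0 Bd fuel (pvParentB Bd (some x)) b := by simp [pvNca, heq, hc]
        have hstepA : pvMeetF topo Ad (fuel+1) (pvPhi (some x)) (pvPhi b) =
            pvMeetF topo Ad fuel (Ad.getD (pvPhi (some x)) (pvPhi (some x))) (pvPhi b) := by
          simp only [pvMeetF, if_neg hphne, if_pos hc']
        rw [hstepB, hstepA, hparA, ← hpar]
        exact ih _ b (pvBOk_parent topo Bd hB ha rfl).1 hb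
      · have hc' : ¬ pvIdxS topo (pvPhi a) > pvIdxS topo (pvPhi b) := by rw [← hra, ← hrb]; exact hc
        obtain ⟨y, rfl⟩ : ∃ y, b = some y := by
          cases b with
          | none =>
            exfalso
            have h0 : pvIdxS topo (pvPhi (none : Option String)) = -1 := by simp [pvPhi, pvIdxS, pvMS]
            have hage : pvIdxS topo (pvPhi a) ≥ -1 := by simp only [pvIdxS]; omega
            have ha0 : pvIdxS topo (pvPhi a) = -1 := by
              rw [h0] at hc'; omega
            have : pvMS topo (pvPhi a) = 0 := by simp only [pvIdxS] at ha0; omega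
            have : pvPhi a = pvVROOT := pvMS_eq_zero topo this
            exact heq (pvPhi_inj topo hvr Bd ha hb (by show pvPhi a = pvPhi none; rw [this]; rfl))
          | some y => exact ⟨y, rfl⟩
        obtain ⟨hmem, hsome⟩ := hb y rfl
        obtain ⟨o, ho⟩ := Option.isSome_iff_exists.mp hsome
        have hpar : pvParentB Bd (some y) = o := by
          simp [pvParentB, PySem.Dict.getD_eq_get?_getD, ho]
        have hparA : Ad.getD (pvPhi (some y)) (pvPhi (some y)) = pvPhi o := by
          have := hC y hmem o ho
          simp [pvPhi, PySem.Dict.getD_eq_get?_getD, this]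
        have hstepB : pvNca rank0 Bd (fuel+1) a (some y) =
            pvNca rank0 Bd fuel a (pvParentB Bd (some y)) := by simp [pvNca, heq, hc]
        have hstepA : pvMeetF topo Ad (fuel+1) (pvPhi a) (pvPhi (some y)) =
            pvMeetF topo Ad fuel (pvPhi a) (Ad.getD (pvPhi (some y)) (pvPhi (some y))) := by
          simp only [pvMeetF, if_neg hphne, if_neg hc']
        rw [hstepB, hstepA, hparA, ← hpar]
        exact ih a _ ha (pvBOk_parent topo Bd hB hb rfl).1


-- ---------- A-side intersect lemmas ----------

theorem pvLift_spec (topo : List String) (hnd : topo.Nodup) (hvr : pvVROOT ∉ topo)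
    (rank : PySem.Dict String Int) (hR : pvRankOk topo rank)
    (Ad : PySem.Dict String String) (hA : pvAInv topo Ad) :
    ∀ fuel f1 f2, pvStrOk topo Ad f1 → pvStrOk topo Ad f2 → pvMS topo f1 ≤ fuel →
      (∃ g, pvLift rank Ad fuel f1 f2 = Sum.inr g ∧ pvStrOk topo Ad g ∧
        (g = f1 ∨ pvMS topo g < pvMS topo f1) ∧ ¬ pvIdxS topo g > pvIdxS topo f2 ∧
        pvMeetS topo Ad f1 f2 = pvMeetS topo Ad g f2)
      ∨ (pvLift rank Ad fuel f1 f2 = Sum.inl pvVROOT ∧ f2 = pvVROOT ∧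
        pvMeetS topo Ad f1 f2 = pvVROOT) := by
  intro fuel
  induction fuel with
  | zero =>
    intro f1 f2 h1 h2 hle
    left
    refine ⟨f1, rfl, h1, Or.inl rfl, ?_, rfl⟩
    have e1 : f1 = pvVROOT := pvMS_eq_zero topo (by omega)
    subst e1
    have : pvMS topo pvVROOT = 0 := by simp [pvMS]
    simp only [pvIdxS, this]
    omega
  | succ fuel ih =>
    intro f1 f2 h1 h2 hle
    by_cases hc : rank.getD f1 1000000000 > rank.getD f2 1000000000
    · have hc' : pvIdxS topo f1 > pvIdxS topo f2 := by
        rw [← hR f1 h1.1, ← hR f2 h2.1]; exact hc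
      have hms : pvMS topo f1 > pvMS topo f2 := (pvIdxS_lt_iff topo _ _).mp hc'
      have hne1 : f1 ≠ pvVROOT := by
        intro hv; have h0 : pvMS topo f1 = 0 := by simp [pvMS, hv]
        omega
      have hp := pvParent_ok topo hnd hvr Ad hA h1 hne1
      have hmeet : pvMeetS topo Ad f1 f2 = pvMeetS topo Ad (Ad.getD f1 f1) f2 :=
        pvMeetS_lift_left topo hnd hvr Ad hA f1 f2 h1 h2 hc'
      by_cases hret : Ad.getD f1 f1 = pvVROOT ∧ f2 = pvVROOT
      · right
        refine ⟨?_, hret.2, ?_⟩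
        · simp only [pvLift, if_pos hc]
          exact if_pos hret
        · rw [hmeet, hret.1, hret.2, pvMeetS_refl]
      · have hstep : pvLift rank Ad (fuel+1) f1 f2 = pvLift rank Ad fuel (Ad.getD f1 f1) f2 := by
          simp only [pvLift, if_pos hc]
          exact if_neg hret
        rw [hstep, hmeet]
        rcases ih (Ad.getD f1 f1) f2 hp.1 h2 (by omega) with
          ⟨g, hg, hgs, hgd, hgc, hgm⟩ | ⟨hg, hf2, hgm⟩
        · refine Or.inl ⟨g, hg, hgs, Or.inr ?_, hgc, hgm⟩
          have hplt := hp.2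
          rcases hgd with h | h
          · rw [h]; exact hplt
          · omega
        · exact Or.inr ⟨hg, hf2, hgm⟩
    · left
      refine ⟨f1, by simp [pvLift, hc], h1, Or.inl rfl, ?_, rfl⟩
      rw [← hR f1 h1.1, ← hR f2 h2.1]
      exact hc

theorem pvInterLoop_spec (topo : List String) (hnd : topo.Nodup) (hvr : pvVROOT ∉ topo)
    (rank : PySem.Dict String Int) (hR : pvRankOk topo rank)
    (Ad : PySem.Dict String String) (hA : pvAInv topo Ad)
    (fuelI : Nat) (hFI : topo.length ≤ fuelI) :
    ∀ fuelO f1 f2, pvStrOk topo Ad f1 → pvStrOk topo Ad f2 →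
      pvMS topo f1 + pvMS topo f2 + 1 ≤ fuelO →
      pvInterLoop rank Ad fuelI fuelO f1 f2 = pvMeetS topo Ad f1 f2 := by
  intro fuelO
  induction fuelO with
  | zero => intro f1 f2 _ _ h; omega
  | succ fuelO ih =>
    intro f1 f2 h1 h2 hb
    by_cases heq : f1 = f2
    · subst heq
      rw [pvMeetS_refl]
      simp [pvInterLoop]
    · have hfi1 : pvMS topo f1 ≤ fuelI := le_trans (pvMS_le_length topo f1 h1.1) hFI
      rcases pvLift_spec topo hnd hvr rank hR Ad hA fuelI f1 f2 h1 h2 hfi1 with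
        ⟨g, hg, hgs, hgd, hgc, hgm⟩ | ⟨hg, hf2, hgm⟩
      · have hfi2 : pvMS topo f2 ≤ fuelI := le_trans (pvMS_le_length topo f2 h2.1) hFI
        rcases pvLift_spec topo hnd hvr rank hR Ad hA fuelI f2 g h2 hgs hfi2 with
          ⟨h, hh, hhs, hhd, hhc, hhm⟩ | ⟨hh, hgv, hhm⟩
        · -- continue the outer loop on (g, h)
          have hres : pvInterLoop rank Ad fuelI (fuelO+1) f1 f2 =
              pvInterLoop rank Ad fuelI fuelO g h := by
            simp [pvInterLoop, heq, hg, hh]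
          -- strict progress: not both fingers unchanged
          have hprog : pvMS topo g + pvMS topo h < pvMS topo f1 + pvMS topo f2 := by
            rcases hgd with hgf | hgl
            · rcases hhd with hhf | hhl
              · exfalso
                rw [hgf] at hgc
                rw [hhf, hgf] at hhc
                have l1 := (pvIdxS_lt_iff topo f1 f2).not.mp hgc
                have l2 := (pvIdxS_lt_iff topo f2 f1).not.mp hhc
                exact heq (pvMS_inj topo hnd hvr h1.1 h2.1 (by omega))
              · rw [hgf]; omega
            · rcases hhd with hhf | hhl
              · rw [hhf]; omega
              · omega
          have hmchain : pvMeetS topo Ad f1 f2 = pvMeetS topo Ad g h := by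
            rw [hgm, pvMeetS_comm topo hnd hvr Ad hA g f2 hgs h2, hhm,
              pvMeetS_comm topo hnd hvr Ad hA h g hhs hgs]
          rw [hres, hmchain]
          exact ih g h hgs hhs (by omega)
        · -- early return from the second inner loop
          have hres : pvInterLoop rank Ad fuelI (fuelO+1) f1 f2 = pvVROOT := by
            simp [pvInterLoop, heq, hg, hh]
          rw [hres, hgm, pvMeetS_comm topo hnd hvr Ad hA g f2 hgs h2, hhm]
      · have hres : pvInterLoop rank Ad fuelI (fuelO+1) f1 f2 = pvVROOT := by
          simp [pvInterLoop, heq, hg]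
        rw [hres, hgm]

theorem pvIntersect_eq (topo : List String) (hnd : topo.Nodup) (hvr : pvVROOT ∉ topo)
    (rank : PySem.Dict String Int) (hR : pvRankOk topo rank)
    (Ad : PySem.Dict String String) (hA : pvAInv topo Ad)
    (f1 f2 : String) (h1 : pvStrOk topo Ad f1) (h2 : pvStrOk topo Ad f2) :
    pvIntersect rank Ad topo.length f1 f2 = pvMeetS topo Ad f1 f2 := by
  have m1 := pvMS_le_length topo f1 h1.1
  have m2 := pvMS_le_length topo f2 h2.1
  exact pvInterLoop_spec topo hnd hvr rank hR Ad hA (2*topo.length+4) (by omega)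
    (2*topo.length+4) f1 f2 h1 h2 (by omega)


-- ---------- sweep-level characterizations ----------

def pvNewIdomA (predD : PySem.Dict String (List String)) (rank : PySem.Dict String Int)
    (Ad : PySem.Dict String String) (n : Nat) (v : String) : Option String :=
  match (predD.getD v []).filter (fun p => Ad.contains p) with
  | [] => none
  | p0 :: rest => some (rest.foldl
      (fun acc p => if Ad.contains p then pvIntersect rank Ad n p acc else acc) p0)

def pvNewIdomB (predD : PySem.Dict String (List String)) (rank0 : PySem.Dict String Int)
    (Bd : PySem.Dict String (Option String)) (n : Nat) (v : String) : Option (Option String) :=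
  match (predD.getD v []).filter (fun p => Bd.contains p) with
  | [] => none
  | p0 :: rest => some (rest.foldl (fun d p => pvNca rank0 Bd (2*n+4) (some p) d) (some p0))

theorem pvStepA_char (sources : List String) (predD : PySem.Dict String (List String))
    (rank : PySem.Dict String Int) (n : Nat) (Ad : PySem.Dict String String) (fl : Bool)
    (v : String) :
    pvStepA sources predD rank n (Ad, fl) v =
      if v ∈ sources then (Ad, fl)
      else match pvNewIdomA predD rank Ad n v with
      | none => (Ad, fl)
      | some w => if Ad.get? v ≠ some w then (Ad.insert v w, true) else (Ad, fl) := by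
  by_cases hv : v ∈ sources
  · simp [pvStepA, hv]
  · simp only [pvStepA, pvNewIdomA, if_neg hv]
    cases h : (predD.getD v []).filter (fun p => Ad.contains p) with
    | nil => simp [h]
    | cons p0 rest => simp [h]

theorem pvStepB_char (sources : List String) (predD : PySem.Dict String (List String))
    (rank0 : PySem.Dict String Int) (n : Nat) (Bd : PySem.Dict String (Option String))
    (v : String) :
    pvStepB sources predD rank0 n Bd v =
      if v ∈ sources then Bd.insert v none
      else match pvNewIdomB predD rank0 Bd n v with
      | none => Bd
      | some o => Bd.insert v o := by
  by_cases hv : v ∈ sources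
  · simp [pvStepB, hv]
  · simp only [pvStepB, pvNewIdomB, if_neg hv]
    cases h : (predD.getD v []).filter (fun p => Bd.contains p) with
    | nil => simp [h]
    | cons p0 rest => simp [h]

-- ---------- the rank dictionary ----------

theorem pvRank_get (l : List String) (hnd : l.Nodup) :
    ∀ (s : Int) (d : PySem.Dict String Int) (x : String),
      ((PySem.List.enumerate l s).foldl (fun d p => d.insert p.2 p.1) d).get? x
        = if x ∈ l then some (s + (l.idxOf x : Int)) else d.get? x := by
  induction l with
  | nil => intro s d x; simp [PySem.List.enumerate]
  | cons a l ih =>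
    intro s d x
    rw [PySem.List.enumerate_cons]
    have hstep : ((((s, a) :: PySem.List.enumerate l (s+1))).foldl
        (fun d p => d.insert p.2 p.1) d)
        = (PySem.List.enumerate l (s+1)).foldl (fun d p => d.insert p.2 p.1) (d.insert a s) := by
      rfl
    rw [hstep, ih hnd.of_cons (s+1) (d.insert a s) x]
    by_cases hx : x ∈ l
    · have hxa : x ≠ a := fun h => ((List.nodup_cons.mp hnd).1 (h ▸ hx)).elim
      rw [if_pos hx, if_pos (List.mem_cons.mpr (Or.inr hx))]
      rw [List.idxOf_cons_ne _ (Ne.symm hxa)]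
      congr 1
      push_cast
      ring
    · rw [if_neg hx]
      by_cases hxa : x = a
      · subst hxa
        rw [if_pos (List.mem_cons.mpr (Or.inl rfl)), PySem.Dict.get?_insert_self,
          List.idxOf_cons_self]
        simp
      · rw [if_neg (by simp [hxa, hx]), PySem.Dict.get?_insert_of_ne _ _ hxa]

theorem pvRankOkB_holds (topo : List String) (hnd : topo.Nodup) :
    pvRankOkB topo
      ((PySem.List.enumerate topo).foldl (fun d p => d.insert p.2 p.1) PySem.Dict.empty) := by
  intro x hx
  rw [PySem.Dict.getD_eq_get?_getD, pvRank_get topo hnd 0 PySem.Dict.empty x, if_pos hx]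
  simp

theorem pvRankOk_holds (topo : List String) (hnd : topo.Nodup) (hvr : pvVROOT ∉ topo) :
    pvRankOk topo
      (((PySem.List.enumerate topo).foldl (fun d p => d.insert p.2 p.1)
        PySem.Dict.empty).insert pvVROOT (-1)) := by
  intro f hf
  rcases hf with h | h
  · subst h
    rw [PySem.Dict.getD_eq_get?_getD, PySem.Dict.get?_insert_self]
    simp [pvIdxS, pvMS]
  · have hne : f ≠ pvVROOT := fun hh => hvr (hh ▸ h)
    rw [PySem.Dict.getD_eq_get?_getD, PySem.Dict.get?_insert_of_ne _ _ hne,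
      pvRank_get topo hnd 0 PySem.Dict.empty f, if_pos h]
    simp [pvIdxS, pvMS, hne]

-- ---------- prefix positions ----------

theorem pvIdxOf_append_not_mem (p : String) :
    ∀ (pre rest : List String), p ∉ pre → (pre ++ rest).idxOf p = pre.length + rest.idxOf p := by
  intro pre
  induction pre with
  | nil => intro rest _; simp
  | cons a pre ih =>
    intro rest hp
    have hpa : p ≠ a := fun h => hp (List.mem_cons.mpr (Or.inl h))
    rw [List.cons_append, List.idxOf_cons_ne _ (Ne.symm hpa), ih rest (fun h => hp (List.mem_cons.mpr (Or.inr h)))]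
    simp
    omega

theorem pvEarlier_mem_pre (topo pre suf : List String) (v : String) (hnd : topo.Nodup)
    (h : topo = pre ++ v :: suf) {p : String} (hp : p ∈ topo)
    (hlt : topo.idxOf p < topo.idxOf v) : p ∈ pre := by
  subst h
  have hndp := hnd
  rw [List.nodup_append] at hndp
  have hvpre : v ∉ pre := fun hv => hndp.2.2 v hv v List.mem_cons_self rfl
  have hidv : (pre ++ v :: suf).idxOf v = pre.length := by
    rw [pvIdxOf_append_not_mem v pre (v :: suf) hvpre, List.idxOf_cons_self]
    omega
  by_contra hppre
  have hid : (pre ++ v :: suf).idxOf p = pre.length + (v :: suf).idxOf p :=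
    pvIdxOf_append_not_mem p pre (v :: suf) hppre
  omega


-- ---------- per-node correspondence ----------

theorem pvStrOk_of_BOk (topo : List String) (Ad : PySem.Dict String String)
    (Bd : PySem.Dict String (Option String)) (hA : pvAInv topo Ad) (hC : pvCorr topo Ad Bd)
    {o : Option String} (ho : pvBOk topo Bd o) : pvStrOk topo Ad (pvPhi o) := by
  cases o with
  | none =>
    exact ⟨Or.inl rfl, Option.isSome_iff_exists.mpr ⟨pvVROOT, hA.1⟩⟩
  | some x =>
    obtain ⟨hmem, hsome⟩ := ho x rfl
    obtain ⟨o', ho'⟩ := Option.isSome_iff_exists.mp hsome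
    exact ⟨Or.inr hmem, Option.isSome_iff_exists.mpr ⟨pvPhi o', hC x hmem o' ho'⟩⟩

theorem pvBOk_of_contains (topo : List String) (Bd : PySem.Dict String (Option String))
    {p : String} (hmem : p ∈ topo) (hc : Bd.contains p = true) : pvBOk topo Bd (some p) := by
  intro x hx
  cases hx
  refine ⟨hmem, ?_⟩
  rw [← PySem.Dict.contains_eq_isSome_get?]
  exact hc

theorem pvFold_eq (topo : List String) (hnd : topo.Nodup) (hvr : pvVROOT ∉ topo)
    (rank rank0 : PySem.Dict String Int) (Ad : PySem.Dict String String)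
    (Bd : PySem.Dict String (Option String))
    (hR : pvRankOk topo rank) (hRB : pvRankOkB topo rank0)
    (hA : pvAInv topo Ad) (hB : pvBInv topo Bd) (hC : pvCorr topo Ad Bd) (r : Nat) :
    ∀ (rest : List String) (d : Option String), pvBOk topo Bd d → pvMS topo (pvPhi d) ≤ r →
      (∀ p ∈ rest, p ∈ topo ∧ topo.idxOf p < r ∧ Bd.contains p = true ∧ Ad.contains p = true) →
      rest.foldl (fun acc p => if Ad.contains p then pvIntersect rank Ad topo.length p acc else acc) (pvPhi d)
          = pvPhi (rest.foldl (fun d' p => pvNca rank0 Bd (2*topo.length+4) (some p) d') d)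
        ∧ pvBOk topo Bd (rest.foldl (fun d' p => pvNca rank0 Bd (2*topo.length+4) (some p) d') d)
        ∧ pvMS topo (pvPhi (rest.foldl (fun d' p => pvNca rank0 Bd (2*topo.length+4) (some p) d') d)) ≤ r := by
  intro rest
  induction rest with
  | nil => intro d hd hle _; exact ⟨rfl, hd, hle⟩
  | cons p rest ih =>
    intro d hd hle hmem
    obtain ⟨hpt, hplt, hpcB, hpcA⟩ := hmem p List.mem_cons_self
    have hBokp : pvBOk topo Bd (some p) := pvBOk_of_contains topo Bd hpt hpcB
    have hso_p : pvStrOk topo Ad p := by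
      have := pvStrOk_of_BOk topo Ad Bd hA hC hBokp
      simpa [pvPhi] using this
    have hso_d : pvStrOk topo Ad (pvPhi d) := pvStrOk_of_BOk topo Ad Bd hA hC hd
    set d' := pvNca rank0 Bd (2*topo.length+4) (some p) d with hd'def
    have hphi : pvIntersect rank Ad topo.length p (pvPhi d) = pvPhi d' := by
      rw [pvIntersect_eq topo hnd hvr rank hR Ad hA p (pvPhi d) hso_p hso_d, hd'def]
      rw [pvNca_phi topo hnd hvr Ad Bd rank0 hRB hA hB hC (2*topo.length+4) (some p) d hBokp hd]
      have m1 := pvMS_le_length topo (pvPhi (some p)) (pvStrOk_of_BOk topo Ad Bd hA hC hBokp).1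
      have m2 := pvMS_le_length topo (pvPhi d) hso_d.1
      rw [pvMeetF_eq_meetS topo hnd hvr Ad hA (2*topo.length+4) _ _
        (pvStrOk_of_BOk topo Ad Bd hA hC hBokp) hso_d (by omega)]
      rfl
    have hd'ok := pvNca_ok topo hvr Bd rank0 hRB hB (2*topo.length+4) (some p) d hBokp hd
    have hmsp : pvMS topo (pvPhi (some p)) = topo.idxOf p + 1 := by
      have : p ≠ pvVROOT := fun hh => hvr (hh ▸ hpt)
      simp [pvPhi, pvMS, this]
    have step : (p :: rest).foldl
        (fun acc q => if Ad.contains q then pvIntersect rank Ad topo.length q acc else acc) (pvPhi d)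
        = rest.foldl (fun acc q => if Ad.contains q then pvIntersect rank Ad topo.length q acc else acc)
            (pvPhi d') := by
      rw [List.foldl_cons]
      congr 1
      rw [if_pos hpcA, hphi]
    rw [step]
    have stepB : (p :: rest).foldl (fun d'' q => pvNca rank0 Bd (2*topo.length+4) (some q) d'') d
        = rest.foldl (fun d'' q => pvNca rank0 Bd (2*topo.length+4) (some q) d'') d' := by
      rw [List.foldl_cons]
    rw [stepB]
    refine ih d' hd'ok.1 ?_ (fun q hq => hmem q (List.mem_cons.mpr (Or.inr hq)))
    rw [hd'def]
    have h2 := hd'ok.2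
    omega

theorem pvNewIdom_corr (topo : List String) (hnd : topo.Nodup) (hvr : pvVROOT ∉ topo)
    (predD : PySem.Dict String (List String)) (rank rank0 : PySem.Dict String Int)
    (Ad : PySem.Dict String String) (Bd : PySem.Dict String (Option String))
    (hR : pvRankOk topo rank) (hRB : pvRankOkB topo rank0)
    (hA : pvAInv topo Ad) (hB : pvBInv topo Bd) (hC : pvCorr topo Ad Bd) (v : String)
    (hpred : ∀ p ∈ predD.getD v [], Bd.contains p = true → p ∈ topo ∧ topo.idxOf p < topo.idxOf v)
    (hbidir : ∀ p ∈ predD.getD v [], Ad.contains p = Bd.contains p) :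
    pvNewIdomA predD rank Ad topo.length v
        = (pvNewIdomB predD rank0 Bd topo.length v).map pvPhi ∧
      ∀ o, pvNewIdomB predD rank0 Bd topo.length v = some o →
        pvBOk topo Bd o ∧ pvMS topo (pvPhi o) ≤ topo.idxOf v := by
  have hfeq : (predD.getD v []).filter (fun p => Ad.contains p)
      = (predD.getD v []).filter (fun p => Bd.contains p) :=
    List.filter_congr (fun p hp => by rw [hbidir p hp])
  unfold pvNewIdomA pvNewIdomB
  rw [hfeq]
  cases h : (predD.getD v []).filter (fun p => Bd.contains p) with
  | nil => exact ⟨rfl, by intro o ho; cases ho⟩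
  | cons p0 rest =>
    have hmem0 : p0 ∈ (predD.getD v []).filter (fun p => Bd.contains p) := by
      rw [h]; exact List.mem_cons_self
    obtain ⟨hp0p, hp0c⟩ := List.mem_filter.mp hmem0
    obtain ⟨hp0t, hp0lt⟩ := hpred p0 hp0p (by simpa using hp0c)
    have hBok0 : pvBOk topo Bd (some p0) := pvBOk_of_contains topo Bd hp0t hp0c
    have hms0 : pvMS topo (pvPhi (some p0)) ≤ topo.idxOf v := by
      have : p0 ≠ pvVROOT := fun hh => hvr (hh ▸ hp0t)
      simp only [pvPhi, pvMS, if_neg this]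
      omega
    have hrest : ∀ p ∈ rest, p ∈ topo ∧ topo.idxOf p < topo.idxOf v ∧
        Bd.contains p = true ∧ Ad.contains p = true := by
      intro p hp
      have hpf : p ∈ (predD.getD v []).filter (fun q => Bd.contains q) := by
        rw [h]; exact List.mem_cons.mpr (Or.inr hp)
      obtain ⟨hpp, hpc⟩ := List.mem_filter.mp hpf
      obtain ⟨hpt, hplt⟩ := hpred p hpp (by simpa using hpc)
      exact ⟨hpt, hplt, by simpa using hpc, by rw [hbidir p hpp]; simpa using hpc⟩
    have := pvFold_eq topo hnd hvr rank rank0 Ad Bd hR hRB hA hB hC (topo.idxOf v)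
      rest (some p0) hBok0 hms0 hrest
    refine ⟨?_, ?_⟩
    · simp only [Option.map_some]
      rw [← this.1]
      rfl
    · intro o ho
      have : some (rest.foldl (fun d' p => pvNca rank0 Bd (2*topo.length+4) (some p) d') (some p0)) = some o := ho
      obtain rfl := Option.some.inj this
      exact ⟨(pvFold_eq topo hnd hvr rank rank0 Ad Bd hR hRB hA hB hC (topo.idxOf v)
        rest (some p0) hBok0 hms0 hrest).2.1,
        (pvFold_eq topo hnd hvr rank rank0 Ad Bd hR hRB hA hB hC (topo.idxOf v)
        rest (some p0) hBok0 hms0 hrest).2.2⟩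


-- ---------- frame lemma ----------

theorem pvIdxOf_lt_of_mem_pre (x : String) :
    ∀ (pre rest : List String), x ∈ pre → (pre ++ rest).idxOf x < pre.length := by
  intro pre
  induction pre with
  | nil => intro rest h; cases h
  | cons a pre ih =>
    intro rest h
    by_cases hxa : x = a
    · subst hxa
      rw [List.cons_append, List.idxOf_cons_self]
      simp
    · have hx : x ∈ pre := (List.mem_cons.mp h).resolve_left hxa
      rw [List.cons_append, List.idxOf_cons_ne _ (Ne.symm hxa)]
      have := ih rest hx
      simp only [List.length_cons]
      omega

theorem pvNewIdomA_frame (topo sources : List String) (hnd : topo.Nodup) (hvr : pvVROOT ∉ topo)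
    (predD : PySem.Dict String (List String)) (rank : PySem.Dict String Int)
    (hR : pvRankOk topo rank) (Ad₁ Ad₂ : PySem.Dict String String)
    (hA1 : pvAInv topo Ad₁) (hA2 : pvAInv topo Ad₂)
    (hK1 : pvAKeys topo sources Ad₁) (hK2 : pvAKeys topo sources Ad₂) (x : String)
    (hpred : ∀ p ∈ predD.getD x [], pvPredOk topo sources x p)
    (hagree : ∀ y, y = pvVROOT ∨ (y ∈ topo ∧ topo.idxOf y < topo.idxOf x) →
      Ad₁.get? y = Ad₂.get? y) :
    pvNewIdomA predD rank Ad₁ topo.length x = pvNewIdomA predD rank Ad₂ topo.length x := by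
  have hjunk : ∀ (Ad : PySem.Dict String String), pvAKeys topo sources Ad →
      ∀ p, p ∉ topo → p ∉ sources → p ≠ pvVROOT → Ad.contains p = false := by
    intro Ad hK p h1 h2 h3
    rw [PySem.Dict.contains_eq_isSome_get?]
    cases hs : (Ad.get? p).isSome with
    | false => rfl
    | true => rcases hK p hs with h | h | h <;> [exact absurd h h3; exact absurd h h2; exact absurd h h1]
  have hceq : ∀ p ∈ predD.getD x [], Ad₁.contains p = Ad₂.contains p := by
    intro p hp
    rcases hpred p hp with hg | ⟨h1, h2, h3⟩
    · rw [PySem.Dict.contains_eq_isSome_get?, PySem.Dict.contains_eq_isSome_get?,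
        hagree p (Or.inr hg)]
    · rw [hjunk Ad₁ hK1 p h1 h2 h3, hjunk Ad₂ hK2 p h1 h2 h3]
  have hfeq : (predD.getD x []).filter (fun p => Ad₁.contains p)
      = (predD.getD x []).filter (fun p => Ad₂.contains p) :=
    List.filter_congr (fun p hp => by rw [hceq p hp])
  have hstrOk2 : ∀ f, pvStrOk topo Ad₁ f → pvMS topo f ≤ topo.idxOf x → pvStrOk topo Ad₂ f := by
    intro f hf hle
    refine ⟨hf.1, ?_⟩
    rcases hf.1 with hfv | hft
    · rw [← hagree f (Or.inl hfv)]; exact hf.2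
    · have hne : f ≠ pvVROOT := fun hh => hvr (hh ▸ hft)
      have : topo.idxOf f < topo.idxOf x := by
        have : pvMS topo f = topo.idxOf f + 1 := by simp [pvMS, hne]
        omega
      rw [← hagree f (Or.inr ⟨hft, this⟩)]; exact hf.2
  unfold pvNewIdomA
  rw [hfeq]
  cases h : (predD.getD x []).filter (fun p => Ad₂.contains p) with
  | nil => rfl
  | cons p0 rest =>
    have hfacts : ∀ p ∈ p0 :: rest, p ∈ topo ∧ topo.idxOf p < topo.idxOf x ∧
        Ad₁.contains p = true ∧ Ad₂.contains p = true := by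
      intro p hp
      have hpf : p ∈ (predD.getD x []).filter (fun q => Ad₂.contains q) := by rw [h]; exact hp
      obtain ⟨hpp, hpc⟩ := List.mem_filter.mp hpf
      have hpc' : Ad₂.contains p = true := by simpa using hpc
      obtain ⟨hpt, hplt⟩ : p ∈ topo ∧ topo.idxOf p < topo.idxOf x := by
        rcases hpred p hpp with hg | ⟨h1, h2, h3⟩
        · exact hg
        · rw [hjunk Ad₂ hK2 p h1 h2 h3] at hpc'; cases hpc'
      exact ⟨hpt, hplt, by rw [hceq p hpp]; exact hpc', hpc'⟩
    show some _ = some _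
    obtain ⟨hp0t, hp0lt, hp0c1, _⟩ := hfacts p0 List.mem_cons_self
    have hp0so : pvStrOk topo Ad₁ p0 := by
      refine ⟨Or.inr hp0t, ?_⟩
      rw [← PySem.Dict.contains_eq_isSome_get?]
      exact hp0c1
    have hp0ms : pvMS topo p0 ≤ topo.idxOf x := by
      have : p0 ≠ pvVROOT := fun hh => hvr (hh ▸ hp0t)
      simp only [pvMS, if_neg this]
      omega
    congr 1
    have main : ∀ (l : List String), (∀ p ∈ l, p ∈ topo ∧ topo.idxOf p < topo.idxOf x ∧
        Ad₁.contains p = true ∧ Ad₂.contains p = true) →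
        ∀ acc, pvStrOk topo Ad₁ acc → pvMS topo acc ≤ topo.idxOf x →
        l.foldl (fun a p => if Ad₁.contains p then pvIntersect rank Ad₁ topo.length p a else a) acc
          = l.foldl (fun a p => if Ad₂.contains p then pvIntersect rank Ad₂ topo.length p a else a) acc := by
      intro l
      induction l with
      | nil => intro _ acc _ _; rfl
      | cons p l ih =>
        intro hl acc hacc hle
        obtain ⟨hpt, hplt, hc1, hc2⟩ := hl p List.mem_cons_self
        have hpso : pvStrOk topo Ad₁ p := by
          refine ⟨Or.inr hpt, ?_⟩
          rw [← PySem.Dict.contains_eq_isSome_get?]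
          exact hc1
        have hpms : pvMS topo p ≤ topo.idxOf x := by
          have : p ≠ pvVROOT := fun hh => hvr (hh ▸ hpt)
          simp only [pvMS, if_neg this]
          omega
        have hieq : pvIntersect rank Ad₁ topo.length p acc = pvIntersect rank Ad₂ topo.length p acc := by
          rw [pvIntersect_eq topo hnd hvr rank hR Ad₁ hA1 p acc hpso hacc,
            pvIntersect_eq topo hnd hvr rank hR Ad₂ hA2 p acc (hstrOk2 p hpso hpms)
              (hstrOk2 acc hacc hle)]
          unfold pvMeetS
          exact pvMeetF_frame topo hnd hvr Ad₁ Ad₂ hA1 (topo.idxOf x) hagree _ p acc hpso hacc hpms hle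
        have hnext := pvMeetF_ok topo hnd hvr Ad₁ hA1 (pvMS topo p + pvMS topo acc + 1) p acc hpso hacc
        rw [show pvMeetF topo Ad₁ (pvMS topo p + pvMS topo acc + 1) p acc
          = pvMeetS topo Ad₁ p acc from rfl] at hnext
        rw [List.foldl_cons, List.foldl_cons, if_pos hc1, if_pos hc2, ← hieq,
          pvIntersect_eq topo hnd hvr rank hR Ad₁ hA1 p acc hpso hacc]
        exact ih (fun q hq => hl q (List.mem_cons.mpr (Or.inr hq))) _ hnext.1 (by omega)
    exact main rest (fun q hq => hfacts q (List.mem_cons.mpr (Or.inr hq))) p0 hp0so hp0ms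


-- ---------- the sweep invariant ----------

def pvInv1 (topo sources : List String) (predD : PySem.Dict String (List String))
    (rank : PySem.Dict String Int) (pre : List String)
    (Ad : PySem.Dict String String) (Bd : PySem.Dict String (Option String)) : Prop :=
  pvAInv topo Ad ∧ pvBInv topo Bd ∧ pvCorr topo Ad Bd ∧
  (∀ x ∈ pre, Ad.get? x = (Bd.get? x).map pvPhi) ∧
  (∀ x ∈ topo, x ∉ pre → Ad.get? x = (if x ∈ sources then some pvVROOT else none)) ∧
  (∀ x ∈ topo, x ∉ pre → Bd.get? x = none) ∧
  (∀ x ∈ pre, x ∉ sources → pvNewIdomA predD rank Ad topo.length x = (Bd.get? x).map pvPhi) ∧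
  pvAKeys topo sources Ad ∧ pvBKeys topo Bd

theorem pvIdom0_get (sources : List String) :
    ∀ (l : List String) (d : PySem.Dict String String) (x : String),
      (l.foldl (fun d s => d.insert s pvVROOT) d).get? x
        = if x ∈ l then some pvVROOT else d.get? x := by
  intro l
  induction l with
  | nil => intro d x; simp
  | cons a l ih =>
    intro d x
    rw [List.foldl_cons, ih (d.insert a pvVROOT) x]
    by_cases hx : x ∈ l
    · rw [if_pos hx, if_pos (List.mem_cons.mpr (Or.inr hx))]
    · rw [if_neg hx]
      by_cases hxa : x = a
      · subst hxa
        rw [if_pos List.mem_cons_self, PySem.Dict.get?_insert_self]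
      · rw [if_neg (by simp [hxa, hx]), PySem.Dict.get?_insert_of_ne _ _ hxa]

theorem pvInv1_init (topo sources : List String) (predD : PySem.Dict String (List String))
    (rank : PySem.Dict String Int) (hvr : pvVROOT ∉ topo) :
    pvInv1 topo sources predD rank []
      (sources.foldl (fun d s => d.insert s pvVROOT) (PySem.Dict.empty.insert pvVROOT pvVROOT))
      PySem.Dict.empty := by
  have hget : ∀ x, (sources.foldl (fun d s => d.insert s pvVROOT)
      (PySem.Dict.empty.insert pvVROOT pvVROOT)).get? x
      = if x ∈ sources then some pvVROOT else if x = pvVROOT then some pvVROOT else none := by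
    intro x
    rw [pvIdom0_get sources sources _ x]
    by_cases hx : x ∈ sources
    · rw [if_pos hx, if_pos hx]
    · rw [if_neg hx, if_neg hx]
      by_cases hxv : x = pvVROOT
      · subst hxv; rw [PySem.Dict.get?_insert_self, if_pos rfl]
      · rw [PySem.Dict.get?_insert_of_ne _ _ hxv, if_neg hxv, PySem.Dict.get?_empty]
  refine ⟨⟨?_, ?_⟩, ?_, ?_, ?_, ?_, ?_, ?_, ?_, ?_⟩
  · rw [hget]
    by_cases hv : pvVROOT ∈ sources <;> simp [hv]
  · intro x hx y hy
    rw [hget x] at hy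
    by_cases hxs : x ∈ sources
    · rw [if_pos hxs] at hy; exact Or.inl (Option.some.inj hy).symm
    · have hxv : x ≠ pvVROOT := fun hh => hvr (hh ▸ hx)
      rw [if_neg hxs, if_neg hxv] at hy; cases hy
  · intro x _ o ho
    rw [PySem.Dict.get?_empty] at ho; cases ho
  · intro x _ o ho
    rw [PySem.Dict.get?_empty] at ho; cases ho
  · intro x hx; cases hx
  · intro x hx _
    have hxv : x ≠ pvVROOT := fun hh => hvr (hh ▸ hx)
    rw [hget]
    by_cases hxs : x ∈ sources
    · rw [if_pos hxs, if_pos hxs]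
    · rw [if_neg hxs, if_neg hxv, if_neg hxs]
  · intro x _ _; rw [PySem.Dict.get?_empty]
  · intro x hx; cases hx
  · intro x hs
    rw [hget] at hs
    by_cases hxs : x ∈ sources
    · exact Or.inr (Or.inl hxs)
    · rw [if_neg hxs] at hs
      by_cases hxv : x = pvVROOT
      · exact Or.inl hxv
      · rw [if_neg hxv] at hs; cases hs
  · intro x hs
    rw [PySem.Dict.get?_empty] at hs; cases hs


theorem pvBOk_insert (topo : List String) (Bd : PySem.Dict String (Option String))
    (v : String) (o' : Option String) {o : Option String} (h : pvBOk topo Bd o) :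
    pvBOk topo (Bd.insert v o') o := by
  intro y hy
  obtain ⟨hmem, hsome⟩ := h y hy
  refine ⟨hmem, ?_⟩
  rw [PySem.Dict.get?_insert]
  by_cases hyv : y = v
  · simp [hyv]
  · rw [if_neg hyv]; exact hsome

theorem pvInv1_step (topo sources : List String) (predD : PySem.Dict String (List String))
    (rank rank0 : PySem.Dict String Int)
    (hnd : topo.Nodup) (hvr : pvVROOT ∉ topo)
    (hR : pvRankOk topo rank) (hRB : pvRankOkB topo rank0)
    (hPre : ∀ w ∈ topo, w ∉ sources → ∀ p ∈ predD.getD w [], pvPredOk topo sources w p)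
    (pre suf : List String) (v : String) (hsplit : topo = pre ++ v :: suf)
    (Ad : PySem.Dict String String) (Bd : PySem.Dict String (Option String)) (fl : Bool)
    (hI : pvInv1 topo sources predD rank pre Ad Bd) :
    pvInv1 topo sources predD rank (pre ++ [v])
      (pvStepA sources predD rank topo.length (Ad, fl) v).1
      (pvStepB sources predD rank0 topo.length Bd v) := by
  obtain ⟨hA, hB, hC, hP, hUA, hUB, hS, hKA, hKB⟩ := hI
  have hvmem : v ∈ topo := by rw [hsplit]; exact List.mem_append.mpr (Or.inr List.mem_cons_self)
  have hvpre : v ∉ pre := by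
    have hnd' := hnd
    rw [hsplit, List.nodup_append] at hnd'
    exact fun hv => hnd'.2.2 v hv v List.mem_cons_self rfl
  have hvV : v ≠ pvVROOT := fun hh => hvr (hh ▸ hvmem)
  have hidxv : topo.idxOf v = pre.length := by
    rw [hsplit, pvIdxOf_append_not_mem v pre (v :: suf) hvpre, List.idxOf_cons_self]
    omega
  have hidxpre : ∀ x ∈ pre, topo.idxOf x < topo.idxOf v := by
    intro x hx
    rw [hidxv, hsplit]
    exact pvIdxOf_lt_of_mem_pre x pre (v :: suf) hx
  have hpretopo : ∀ x ∈ pre, x ∈ topo := by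
    intro x hx; rw [hsplit]; exact List.mem_append.mpr (Or.inl hx)
  have hnev : ∀ x ∈ pre, x ≠ v := fun x hx h => hvpre (h ▸ hx)
  by_cases hv : v ∈ sources
  · -- source: A unchanged, B records the virtual root
    have eA : (pvStepA sources predD rank topo.length (Ad, fl) v).1 = Ad := by
      rw [pvStepA_char, if_pos hv]
    have eB : pvStepB sources predD rank0 topo.length Bd v = Bd.insert v none := by
      rw [pvStepB_char, if_pos hv]
    rw [eA, eB]
    refine ⟨hA, ?_, ?_, ?_, ?_, ?_, ?_, hKA, ?_⟩
    · intro x hx o ho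
      rw [PySem.Dict.get?_insert] at ho
      by_cases hxv : x = v
      · rw [if_pos hxv] at ho
        obtain rfl := Option.some.inj ho
        refine ⟨?_, ?_⟩
        · intro y hy; cases hy
        · simp [pvPhi, pvMS]
      · rw [if_neg hxv] at ho
        obtain ⟨h1, h2⟩ := hB x hx o ho
        exact ⟨pvBOk_insert topo Bd v none h1, h2⟩
    · intro x hx o ho
      rw [PySem.Dict.get?_insert] at ho
      by_cases hxv : x = v
      · rw [if_pos hxv] at ho
        obtain rfl := Option.some.inj ho
        subst hxv
        rw [hUA x hx hvpre, if_pos hv]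
        rfl
      · rw [if_neg hxv] at ho
        exact hC x hx o ho
    · intro x hx
      rcases List.mem_append.mp hx with hx | hx
      · rw [PySem.Dict.get?_insert, if_neg (hnev x hx)]
        exact hP x hx
      · obtain rfl := List.mem_singleton.mp hx
        rw [PySem.Dict.get?_insert, if_pos rfl, hUA x hvmem hvpre, if_pos hv]
        rfl
    · intro x hx hnx
      exact hUA x hx (fun h => hnx (List.mem_append.mpr (Or.inl h)))
    · intro x hx hnx
      have hxisv : x ≠ v := fun h => hnx (List.mem_append.mpr (Or.inr (h ▸ List.mem_singleton_self x)))
      rw [PySem.Dict.get?_insert, if_neg hxisv]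
      exact hUB x hx (fun h => hnx (List.mem_append.mpr (Or.inl h)))
    · intro x hx hxs
      rcases List.mem_append.mp hx with hx | hx
      · rw [PySem.Dict.get?_insert, if_neg (hnev x hx)]
        exact hS x hx hxs
      · obtain rfl := List.mem_singleton.mp hx
        exact absurd hv hxs
    · intro x hs
      rw [PySem.Dict.get?_insert] at hs
      by_cases hxv : x = v
      · exact hxv ▸ hvmem
      · rw [if_neg hxv] at hs
        exact hKB x hs
  · -- non-source: both sides compute the same new idom
    have hpredv := hPre v hvmem hv
    have hbidir : ∀ p ∈ predD.getD v [], Ad.contains p = Bd.contains p := by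
      intro p hp
      rcases hpredv p hp with ⟨hpt, hplt⟩ | ⟨h1, h2, h3⟩
      · have hppre : p ∈ pre := pvEarlier_mem_pre topo pre suf v hnd hsplit hpt hplt
        rw [PySem.Dict.contains_eq_isSome_get?, PySem.Dict.contains_eq_isSome_get?, hP p hppre]
        cases Bd.get? p <;> rfl
      · rw [PySem.Dict.contains_eq_isSome_get?, PySem.Dict.contains_eq_isSome_get?]
        have e1 : (Ad.get? p).isSome = false := by
          cases hs : (Ad.get? p).isSome with
          | false => rfl
          | true => rcases hKA p hs with h | h | h <;>
              [exact absurd h h3; exact absurd h h2; exact absurd h h1]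
        have e2 : (Bd.get? p).isSome = false := by
          cases hs : (Bd.get? p).isSome with
          | false => rfl
          | true => exact absurd (hKB p hs) h1
        rw [e1, e2]
    have hpredv' : ∀ p ∈ predD.getD v [], Bd.contains p = true →
        p ∈ topo ∧ topo.idxOf p < topo.idxOf v := by
      intro p hp hc
      rcases hpredv p hp with hg | ⟨h1, _, _⟩
      · exact hg
      · exfalso
        rw [PySem.Dict.contains_eq_isSome_get?] at hc
        exact h1 (hKB p hc)
    have hcorrv := pvNewIdom_corr topo hnd hvr predD rank rank0 Ad Bd hR hRB hA hB hC v hpredv' hbidir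
    cases hNB : pvNewIdomB predD rank0 Bd topo.length v with
    | none =>
      have hNA : pvNewIdomA predD rank Ad topo.length v = none := by
        rw [hcorrv.1, hNB]; rfl
      have eA : (pvStepA sources predD rank topo.length (Ad, fl) v).1 = Ad := by
        rw [pvStepA_char, if_neg hv, hNA]
      have eB : pvStepB sources predD rank0 topo.length Bd v = Bd := by
        rw [pvStepB_char, if_neg hv, hNB]
      rw [eA, eB]
      refine ⟨hA, hB, hC, ?_, ?_, ?_, ?_, hKA, hKB⟩
      · intro x hx
        rcases List.mem_append.mp hx with hx | hx
        · exact hP x hx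
        · obtain rfl := List.mem_singleton.mp hx
          rw [hUA x hvmem hvpre, if_neg hv, hUB x hvmem hvpre]
          rfl
      · intro x hx hnx
        exact hUA x hx (fun h => hnx (List.mem_append.mpr (Or.inl h)))
      · intro x hx hnx
        exact hUB x hx (fun h => hnx (List.mem_append.mpr (Or.inl h)))
      · intro x hx hxs
        rcases List.mem_append.mp hx with hx | hx
        · exact hS x hx hxs
        · obtain rfl := List.mem_singleton.mp hx
          rw [hNA, hUB x hvmem hvpre]
          rfl
    | some o =>
      obtain ⟨hook, homs⟩ := hcorrv.2 o hNB
      have hNA : pvNewIdomA predD rank Ad topo.length v = some (pvPhi o) := by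
        rw [hcorrv.1, hNB]; rfl
      have hAvnone : Ad.get? v = none := by rw [hUA v hvmem hvpre, if_neg hv]
      have eA : (pvStepA sources predD rank topo.length (Ad, fl) v).1 = Ad.insert v (pvPhi o) := by
        rw [pvStepA_char, if_neg hv, hNA]
        have hne : Ad.get? v ≠ some (pvPhi o) := by rw [hAvnone]; exact fun h => by cases h
        show (if Ad.get? v ≠ some (pvPhi o) then (Ad.insert v (pvPhi o), true) else (Ad, fl)).1
          = Ad.insert v (pvPhi o)
        rw [if_pos hne]
      have eB : pvStepB sources predD rank0 topo.length Bd v = Bd.insert v o := by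
        rw [pvStepB_char, if_neg hv, hNB]
      rw [eA, eB]
      -- facts about the stored value
      have hphiV : ∀ z, o = some z → z ∈ topo ∧ topo.idxOf z < topo.idxOf v ∧
          (Ad.get? z).isSome = true ∧ (Bd.get? z).isSome = true := by
        intro z hz
        obtain ⟨hzt, hzs⟩ := hook z hz
        have hzv : z ≠ pvVROOT := fun hh => hvr (hh ▸ hzt)
        have hzlt : topo.idxOf z < topo.idxOf v := by
          rw [hz] at homs
          simp only [pvPhi, pvMS, if_neg hzv] at homs
          omega
        obtain ⟨o', ho'⟩ := Option.isSome_iff_exists.mp hzs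
        exact ⟨hzt, hzlt, Option.isSome_iff_exists.mpr ⟨pvPhi o', hC z hzt o' ho'⟩, hzs⟩
      have hAinv' : pvAInv topo (Ad.insert v (pvPhi o)) := by
        refine ⟨?_, ?_⟩
        · rw [PySem.Dict.get?_insert, if_neg (Ne.symm hvV)]
          exact hA.1
        · intro x hx y hy
          rw [PySem.Dict.get?_insert] at hy
          by_cases hxv : x = v
          · rw [if_pos hxv] at hy
            obtain rfl := Option.some.inj hy
            subst hxv
            cases o with
            | none => exact Or.inl rfl
            | some z =>
              simp only [pvPhi]
              obtain ⟨hzt, hzlt, hzsA, _⟩ := hphiV z rfl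
              have hzv : z ≠ x := by
                intro h; rw [h] at hzlt; omega
              refine Or.inr ⟨hzt, hzlt, ?_⟩
              rw [PySem.Dict.get?_insert, if_neg hzv]
              exact hzsA
          · rw [if_neg hxv] at hy
            rcases hA.2 x hx y hy with h | ⟨h1, h2, h3⟩
            · exact Or.inl h
            · refine Or.inr ⟨h1, h2, ?_⟩
              rw [PySem.Dict.get?_insert]
              by_cases hyv : y = v
              · simp [hyv]
              · rw [if_neg hyv]; exact h3
      have hagree_low : ∀ (r : Nat), r ≤ topo.idxOf v →
          ∀ y, y = pvVROOT ∨ (y ∈ topo ∧ topo.idxOf y < r) →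
          Ad.get? y = (Ad.insert v (pvPhi o)).get? y := by
        intro r hr y hy
        rw [PySem.Dict.get?_insert]
        rcases hy with hyv | ⟨hyt, hylt⟩
        · rw [if_neg (by rw [hyv]; exact Ne.symm hvV)]
        · have : y ≠ v := by intro h; rw [h] at hylt; omega
          rw [if_neg this]
      have hKA' : pvAKeys topo sources (Ad.insert v (pvPhi o)) := by
        intro x hs
        rw [PySem.Dict.get?_insert] at hs
        by_cases hxv : x = v
        · exact Or.inr (Or.inr (hxv ▸ hvmem))
        · rw [if_neg hxv] at hs
          exact hKA x hs
      have hKB' : pvBKeys topo (Bd.insert v o) := by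
        intro x hs
        rw [PySem.Dict.get?_insert] at hs
        by_cases hxv : x = v
        · exact hxv ▸ hvmem
        · rw [if_neg hxv] at hs
          exact hKB x hs
      refine ⟨hAinv', ?_, ?_, ?_, ?_, ?_, ?_, hKA', hKB'⟩
      · intro x hx o' ho'
        rw [PySem.Dict.get?_insert] at ho'
        by_cases hxv : x = v
        · rw [if_pos hxv] at ho'
          obtain rfl := Option.some.inj ho'
          subst hxv
          exact ⟨pvBOk_insert topo Bd x o hook, homs⟩
        · rw [if_neg hxv] at ho'
          obtain ⟨h1, h2⟩ := hB x hx o' ho'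
          exact ⟨pvBOk_insert topo Bd v o h1, h2⟩
      · intro x hx o' ho'
        rw [PySem.Dict.get?_insert] at ho'
        rw [PySem.Dict.get?_insert]
        by_cases hxv : x = v
        · rw [if_pos hxv] at ho'
          obtain rfl := Option.some.inj ho'
          rw [if_pos hxv]
        · rw [if_neg hxv] at ho'
          rw [if_neg hxv]
          exact hC x hx o' ho'
      · intro x hx
        rcases List.mem_append.mp hx with hx | hx
        · rw [PySem.Dict.get?_insert, PySem.Dict.get?_insert,
            if_neg (hnev x hx), if_neg (hnev x hx)]
          exact hP x hx
        · obtain rfl := List.mem_singleton.mp hx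
          rw [PySem.Dict.get?_insert, PySem.Dict.get?_insert, if_pos rfl, if_pos rfl]
          rfl
      · intro x hx hnx
        have hxisv : x ≠ v := fun h => hnx (List.mem_append.mpr (Or.inr (h ▸ List.mem_singleton_self x)))
        rw [PySem.Dict.get?_insert, if_neg hxisv]
        exact hUA x hx (fun h => hnx (List.mem_append.mpr (Or.inl h)))
      · intro x hx hnx
        have hxisv : x ≠ v := fun h => hnx (List.mem_append.mpr (Or.inr (h ▸ List.mem_singleton_self x)))
        rw [PySem.Dict.get?_insert, if_neg hxisv]
        exact hUB x hx (fun h => hnx (List.mem_append.mpr (Or.inl h)))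
      · intro x hx hxs
        rcases List.mem_append.mp hx with hx | hx
        · rw [PySem.Dict.get?_insert, if_neg (hnev x hx)]
          rw [← pvNewIdomA_frame topo sources hnd hvr predD rank hR Ad (Ad.insert v (pvPhi o))
            hA hAinv' hKA hKA' x (hPre x (hpretopo x hx) hxs)
            (hagree_low (topo.idxOf x) (le_of_lt (hidxpre x hx)))]
          exact hS x hx hxs
        · obtain rfl := List.mem_singleton.mp hx
          rw [PySem.Dict.get?_insert, if_pos rfl]
          rw [← pvNewIdomA_frame topo sources hnd hvr predD rank hR Ad (Ad.insert x (pvPhi o))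
            hA hAinv' hKA hKA' x (hPre x hvmem hxs) (hagree_low (topo.idxOf x) le_rfl)]
          rw [hNA]
          rfl


theorem pvSweep1 (topo sources : List String) (predD : PySem.Dict String (List String))
    (rank rank0 : PySem.Dict String Int)
    (hnd : topo.Nodup) (hvr : pvVROOT ∉ topo)
    (hR : pvRankOk topo rank) (hRB : pvRankOkB topo rank0)
    (hPre : ∀ w ∈ topo, w ∉ sources → ∀ p ∈ predD.getD w [], pvPredOk topo sources w p) :
    ∀ (suf pre : List String), topo = pre ++ suf →
    ∀ (st : PySem.Dict String String × Bool) (Bd : PySem.Dict String (Option String)),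
      pvInv1 topo sources predD rank pre st.1 Bd →
      pvInv1 topo sources predD rank (pre ++ suf)
        (List.foldl (pvStepA sources predD rank topo.length) st suf).1
        (List.foldl (pvStepB sources predD rank0 topo.length) Bd suf) := by
  intro suf
  induction suf with
  | nil =>
    intro pre hsplit st Bd hI
    simpa using hI
  | cons v suf ih =>
    intro pre hsplit st Bd hI
    rw [List.foldl_cons, List.foldl_cons]
    have hstep := pvInv1_step topo sources predD rank rank0 hnd hvr hR hRB hPre pre suf v hsplit
      st.1 Bd st.2 hI
    rw [Prod.mk.eta] at hstep
    have hsplit' : topo = (pre ++ [v]) ++ suf := by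
      rw [List.append_assoc]
      simpa using hsplit
    have := ih (pre ++ [v]) hsplit' (pvStepA sources predD rank topo.length st v)
      (pvStepB sources predD rank0 topo.length Bd v) hstep
    rw [List.append_assoc] at this
    simpa using this

theorem pvSweep2 (topo sources : List String) (predD : PySem.Dict String (List String))
    (rank : PySem.Dict String Int)
    (Ad : PySem.Dict String String) (Bd : PySem.Dict String (Option String))
    (hI : pvInv1 topo sources predD rank topo Ad Bd) :
    ∀ l : List String, (∀ v ∈ l, v ∈ topo) →
      List.foldl (pvStepA sources predD rank topo.length) (Ad, false) l = (Ad, false) := by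
  obtain ⟨hA, hB, hC, hP, _, _, hS, _, _⟩ := hI
  intro l
  induction l with
  | nil => intro _; rfl
  | cons v l ih =>
    intro hl
    have hvt : v ∈ topo := hl v List.mem_cons_self
    have hstep : pvStepA sources predD rank topo.length (Ad, false) v = (Ad, false) := by
      rw [pvStepA_char]
      by_cases hv : v ∈ sources
      · rw [if_pos hv]
      · rw [if_neg hv, hS v hvt hv]
        cases hBv : Bd.get? v with
        | none => rfl
        | some o =>
          show (if Ad.get? v ≠ some (pvPhi o) then (Ad.insert v (pvPhi o), true) else (Ad, false))
            = (Ad, false)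
          rw [if_neg]
          intro hne
          exact hne (by rw [hP v hvt, hBv]; rfl)
    rw [List.foldl_cons, hstep]
    exact ih (fun w hw => hl w (List.mem_cons.mpr (Or.inr hw)))

theorem pvFoldInsert_congr (fA fB : String → String) :
    ∀ (l : List String) (d : PySem.Dict String String), (∀ v ∈ l, fA v = fB v) →
      List.foldl (fun r v => r.insert v (fA v)) d l = List.foldl (fun r v => r.insert v (fB v)) d l := by
  intro l
  induction l with
  | nil => intro d _; rfl
  | cons v l ih =>
    intro d h
    rw [List.foldl_cons, List.foldl_cons, h v List.mem_cons_self]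
    exact ih _ (fun w hw => h w (List.mem_cons.mpr (Or.inr hw)))

theorem pvInsertNone_get :
    ∀ (l : List String) (d : PySem.Dict String (Option String)) (x : String),
      (l.foldl (fun d v => d.insert v none) d).get? x = if x ∈ l then some none else d.get? x := by
  intro l
  induction l with
  | nil => intro d x; simp
  | cons a l ih =>
    intro d x
    rw [List.foldl_cons, ih (d.insert a none) x]
    by_cases hx : x ∈ l
    · rw [if_pos hx, if_pos (List.mem_cons.mpr (Or.inr hx))]
    · rw [if_neg hx]
      by_cases hxa : x = a
      · subst hxa
        rw [if_pos List.mem_cons_self, PySem.Dict.get?_insert_self]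
      · rw [if_neg (by simp [hxa, hx]), PySem.Dict.get?_insert_of_ne _ _ hxa]

theorem pvAllSrcA (sources : List String) (predD : PySem.Dict String (List String))
    (rank : PySem.Dict String Int) (n : Nat) :
    ∀ (l : List String), (∀ v ∈ l, v ∈ sources) →
      ∀ st, List.foldl (pvStepA sources predD rank n) st l = st := by
  intro l
  induction l with
  | nil => intro _ st; rfl
  | cons v l ih =>
    intro hl st
    rw [List.foldl_cons, pvStepA_char, if_pos (hl v List.mem_cons_self)]
    exact ih (fun w hw => hl w (List.mem_cons.mpr (Or.inr hw))) st

theorem pvAllSrcB (sources : List String) (predD : PySem.Dict String (List String))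
    (rank0 : PySem.Dict String Int) (n : Nat) :
    ∀ (l : List String), (∀ v ∈ l, v ∈ sources) →
      ∀ d, List.foldl (pvStepB sources predD rank0 n) d l
          = l.foldl (fun d v => d.insert v none) d := by
  intro l
  induction l with
  | nil => intro _ d; rfl
  | cons v l ih =>
    intro hl d
    rw [List.foldl_cons, List.foldl_cons, pvStepB_char, if_pos (hl v List.mem_cons_self)]
    exact ih (fun w hw => hl w (List.mem_cons.mpr (Or.inr hw))) _

theorem pvPorts_eq_srcs (topo sources : List String) (pred : List (String × List String))
    (hall : ∀ v ∈ topo, v ∈ sources) :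
    dominators_py topo sources pred = dominators_py_alt topo sources pred := by
  unfold dominators_py dominators_py_alt
  dsimp only
  set predD := PySem.Dict.ofList pred with hpredD
  set rank0 := (PySem.List.enumerate topo).foldl (fun d p => d.insert p.2 p.1) PySem.Dict.empty
    with hrank0
  set idom0 := sources.foldl (fun d s => d.insert s pvVROOT)
    (PySem.Dict.empty.insert pvVROOT pvVROOT) with hidom0
  set rank := rank0.insert pvVROOT (-1) with hrank
  have hW : pvWhileA topo sources predD rank topo.length (topo.length + 2) idom0 = idom0 := by
    show pvWhileA topo sources predD rank topo.length (topo.length + 1 + 1) idom0 = idom0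
    simp only [pvWhileA]
    rw [pvAllSrcA sources predD rank topo.length topo hall (idom0, false)]
  rw [hW, pvAllSrcB sources predD rank0 topo.length topo hall PySem.Dict.empty]
  refine congrArg PySem.Dict.items ?_
  refine pvFoldInsert_congr
    (fun v => if idom0.getD v v = pvVROOT then v else idom0.getD v v)
    (fun v => match (topo.foldl (fun d v => d.insert v none)
        (PySem.Dict.empty : PySem.Dict String (Option String))).get? v with
      | some (some d) => d
      | _ => v) topo PySem.Dict.empty ?_
  intro v hv
  dsimp only
  have hAv : idom0.getD v v = pvVROOT := by
    rw [PySem.Dict.getD_eq_get?_getD, hidom0, pvIdom0_get sources sources _ v,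
      if_pos (hall v hv)]
    rfl
  have hBv : (topo.foldl (fun d v => d.insert v none)
      (PySem.Dict.empty : PySem.Dict String (Option String))).get? v = some none := by
    rw [pvInsertNone_get topo PySem.Dict.empty v, if_pos hv]
  rw [hAv, if_pos rfl, hBv]

theorem pvPorts_eq (topo sources : List String) (pred : List (String × List String))
    (hnd : topo.Nodup) (hvr : pvVROOT ∉ topo)
    (hPre : ∀ w ∈ topo, w ∉ sources → ∀ p ∈ (PySem.Dict.ofList pred).getD w [],
      pvPredOk topo sources w p) :
    dominators_py topo sources pred = dominators_py_alt topo sources pred := by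
  unfold dominators_py dominators_py_alt
  dsimp only
  set predD := PySem.Dict.ofList pred with hpredD
  set rank0 := (PySem.List.enumerate topo).foldl (fun d p => d.insert p.2 p.1) PySem.Dict.empty
    with hrank0
  set idom0 := sources.foldl (fun d s => d.insert s pvVROOT)
    (PySem.Dict.empty.insert pvVROOT pvVROOT) with hidom0
  set rank := rank0.insert pvVROOT (-1) with hrank
  have hR : pvRankOk topo rank := by rw [hrank, hrank0]; exact pvRankOk_holds topo hnd hvr
  have hRB : pvRankOkB topo rank0 := by rw [hrank0]; exact pvRankOkB_holds topo hnd
  have hInit : pvInv1 topo sources predD rank [] idom0 PySem.Dict.empty := by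
    rw [hidom0]; exact pvInv1_init topo sources predD rank hvr
  rcases hfold : List.foldl (pvStepA sources predD rank topo.length) (idom0, false) topo
    with ⟨Af, fl⟩
  have hFin : pvInv1 topo sources predD rank topo Af
      (List.foldl (pvStepB sources predD rank0 topo.length) PySem.Dict.empty topo) := by
    have := pvSweep1 topo sources predD rank rank0 hnd hvr hR hRB hPre topo [] rfl
      (idom0, false) PySem.Dict.empty hInit
    rw [hfold] at this
    simpa using this
  set Bdf := List.foldl (pvStepB sources predD rank0 topo.length) PySem.Dict.empty topo with hBdf
  have hW : pvWhileA topo sources predD rank topo.length (topo.length + 2) idom0 = Af := by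
    show pvWhileA topo sources predD rank topo.length (topo.length + 1 + 1) idom0 = Af
    simp only [pvWhileA]
    rw [hfold]
    cases fl with
    | false => rfl
    | true =>
      show pvWhileA topo sources predD rank topo.length (topo.length + 1) Af = Af
      simp only [pvWhileA]
      rw [pvSweep2 topo sources predD rank Af Bdf hFin topo (fun _ hv => hv)]
  rw [hW]
  refine congrArg PySem.Dict.items ?_
  refine pvFoldInsert_congr
    (fun v => if Af.getD v v = pvVROOT then v else Af.getD v v)
    (fun v => match Bdf.get? v with
      | some (some d) => d
      | _ => v) topo PySem.Dict.empty ?_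
  intro v hv
  dsimp only
  obtain ⟨hA, hB, _, hP, _, _, _, _, _⟩ := hFin
  have hPv := hP v hv
  have hvV : v ≠ pvVROOT := fun hh => hvr (hh ▸ hv)
  cases hBv : Bdf.get? v with
  | none =>
    rw [hBv] at hPv
    have : Af.getD v v = v := by
      rw [PySem.Dict.getD_eq_get?_getD, hPv]
      rfl
    rw [this, if_neg hvV]
  | some o =>
    rw [hBv] at hPv
    cases o with
    | none =>
      have : Af.getD v v = pvVROOT := by
        rw [PySem.Dict.getD_eq_get?_getD, hPv]
        rfl
      rw [this, if_pos rfl]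
    | some z =>
      have hzt : z ∈ topo := by
        have := (hB v hv (some z) hBv).1
        exact (this z rfl).1
      have hzV : z ≠ pvVROOT := fun hh => hvr (hh ▸ hzt)
      have : Af.getD v v = z := by
        rw [PySem.Dict.getD_eq_get?_getD, hPv]
        rfl
      rw [this, if_neg hzV]

-- ===== VERDICT (by name: the statement is the Claim_ definition above) =====
theorem dominators_py_spec : Claim_equal_dominators_py := by
  intro topo sources pred hdom hpre
  show dominators_py topo sources pred = dominators_py_alt topo sources pred
  rcases hpre with hall | ⟨hnd, hvr, hrest⟩
  · exact pvPorts_eq_srcs topo sources pred hall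
  · exact pvPorts_eq topo sources pred hnd hvr (fun w hw hws => (hrest w hw hws).2)
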